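/- GENERATED by mk_final_copies.py from the proof of the farm's unit `start_decoder.7` (farm:start_decoder.7.2: Lemmas.lean) as the
   re-elaboration sweep compiled it — do not edit. -/
import Asan.CheckWalk
import Vorbis.Spec.Units.start_decoder_7
import Vorbis.Spec.StartDecoderATest

/-!
  Unit `start_decoder.7` (loop 3695 with its byte loop 3700): THE SPLIT of the segment at its own cut points
  (`L.start_decoder.cut61`, `cut62`, `cut59`, `cut58`: the labels exist in Vorbis/Labels.lean as "cut in start_decoder.7"),
  the assertion at each of them, and the COMPOSITION of the five sub-segments into `StartDecoder.Seg7` (proved: `compose7`).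
-/

open X86 X86.User Asan Vorbis Vorbis.Spec Vorbis.Spec.StartDecoder

set_option maxRecDepth 4000
set_option maxHeartbeats 4000000

namespace Vorbis.Spec.start_decoder_7

/-- The measure of the outer loop 3695: `max(0, comment_list_length - i)`, `i` = the dword `[R+18H]`. -/
def outerMeasure (g : Ghost) (v : State) : Nat :=
  (stb_vorbis.comment_list_length v.mem g.f - (v.mem.u32 (g.R + 0x18) : Int)).toNat

/-- **What every cut point INSIDE an iteration of loop 3695 carries**: `Body7` without the comment clause, at the program counter
`pc`, with the loop counter `i`, the count `n = comment_list_length` (a ghost: nothing in the loop writes it) and `i < n`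
(the test at 0x1140ab was passed). -/
structure Core7 (u₀ : State) (g : Ghost) (pc : Word) (A : Arena × List Obj) (i : Nat) (n : Int) (v : State) : Prop where
  frame : Frame u₀ g pc A v
  hand : g.Hand A
  rbp : v.reg .rbp = addr g.f
  sd : SDw g.len 1 A (g.Blk A) (g.Live A) v.mem g.f g.R
  noTemps : A.1.temps = []
  /-- the loop counter's spill slot (i of line 3695) -/
  slot_i : v.mem.u32 (g.R + 0x18) = i
  /-- the count, unchanged since the head of the iteration -/
  count : stb_vorbis.comment_list_length v.mem g.f = n
  /-- the iteration was entered -/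
  lt : (i : Int) < n

/-- **`In7a`, 0x1140b8 (`cut61`, `mov ebx, eax`)**: `get32_packet` has returned; eax = ANY 32-bit value; CM1 – CM3 up to `i`. -/
structure In7a (u₀ : State) (g : Ghost) (A : Arena × List Obj) (i : Nat) (n : Int) (v : State) : Prop where
  core : Core7 u₀ g L.start_decoder.cut61 A i n v
  comment : CommentOK A.1.Blk v.mem g.f i
  rax : (v.reg .rax).toNat < 2 ^ 32

/-- **`In7b`, 0x1140ec (`cut62`, `mov r13, rax`)**: `setup_malloc(f, len + 1)` has returned `p`: NULL, or the block of EXACTLY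
`len + 1` bytes of the (grown) ghost arena `A`, which is not the table of comment pointers (it was allocated later).
ebx = len ≤ 7FFFFFFEH (FIX 1), r12 = 8·i, r14 = &f->comment_list, r15 = &comment_list[i] (computed BEFORE the call). -/
structure In7b (u₀ : State) (g : Ghost) (A : Arena × List Obj) (i : Nat) (n : Int) (len p : Nat) (v : State) : Prop where
  core : Core7 u₀ g L.start_decoder.cut62 A i n v
  comment : CommentOK A.1.Blk v.mem g.f i
  rbx : v.reg .rbx = addr len
  len_le : len ≤ 0x7ffffffe
  r12 : v.reg .r12 = addr (8 * i)
  r14 : v.reg .r14 = addr (g.f + 40)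
  r15 : v.reg .r15 = addr (stb_vorbis.comment_list_at v.mem g.f i)
  rax : v.reg .rax = addr p
  result : p = 0 ∨ (A.1.Blk ⟨p, len + 1⟩ ∧ p ≠ stb_vorbis.comment_list v.mem g.f)

/-- **`In7c`, 0x11406d (`cut59` = head of loop 3700, `cmp r13d, ebx`)**: `comment_list[i]` is the block of `len + 1` bytes, so
CM1 – CM3 hold up to `i + 1` already (the byte loop stores into that block only); r13d = j ≤ len = ebx, r12 = 8·i. -/
structure In7c (u₀ : State) (g : Ghost) (A : Arena × List Obj) (i : Nat) (n : Int) (len j : Nat) (v : State) : Prop where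
  core : Core7 u₀ g L.start_decoder.cut59 A i n v
  comment : CommentOK A.1.Blk v.mem g.f (i + 1)
  rbx : v.reg .rbx = addr len
  len_le : len ≤ 0x7ffffffe
  r12 : v.reg .r12 = addr (8 * i)
  r13 : v.reg .r13 = addr j
  j_le : j ≤ len
  /-- the string block of comment `i` -/
  str : A.1.Blk ⟨v.mem.ptr (stb_vorbis.comment_list_at v.mem g.f i), len + 1⟩
  /-- … is not the table of comment pointers: a store into it keeps the table -/
  ne : v.mem.ptr (stb_vorbis.comment_list_at v.mem g.f i) ≠ stb_vorbis.comment_list v.mem g.f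

/-- **`In7d`, 0x11403a (`cut58`, `mov r15d, eax`)**: inside the byte loop, `get8_packet` has returned (al = the byte, eax = −1
at the end of the packet: only al is stored); `j < len`. -/
structure In7d (u₀ : State) (g : Ghost) (A : Arena × List Obj) (i : Nat) (n : Int) (len j : Nat) (v : State) : Prop where
  core : Core7 u₀ g L.start_decoder.cut58 A i n v
  comment : CommentOK A.1.Blk v.mem g.f (i + 1)
  rbx : v.reg .rbx = addr len
  len_le : len ≤ 0x7ffffffe
  r12 : v.reg .r12 = addr (8 * i)
  r13 : v.reg .r13 = addr j
  j_lt : j < len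
  str : A.1.Blk ⟨v.mem.ptr (stb_vorbis.comment_list_at v.mem g.f i), len + 1⟩
  ne : v.mem.ptr (stb_vorbis.comment_list_at v.mem g.f i) ≠ stb_vorbis.comment_list v.mem g.f

/-! ### Where the frame and `*f` are -/

/-- A slot `[R + k]` of the steady frame, as the walker spells it: relative to the ENTRY stack pointer (`k + m = 1480`). -/
theorem slot_addr {u₀ : State} {g : Ghost} {pc : Word} {A : Arena × List Obj} {v : State} (h : Frame u₀ g pc A v)
    (k m : Nat) (hk : k + m = 1480) : addr (g.R + k) = g.e.reg .rsp - UInt64.ofNat m := by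
  have h1 := h.r_eq.1
  have h2 := h.ra.2.1
  simp only [steady, depth, Ghost.RA] at h1 h2
  have e : g.R + k = (g.e.reg .rsp).toNat - m := by omega
  rw [e, ← Vorbis.addr_sub_addr _ _ (by omega), addr_toNat]
  rfl

/-- **`*f` (the object `p` of stb_vorbis_open_memory's frame, or any live object) lies off start_decoder's own stack**
`[RA − 1888, RA + 8)`: it is inside ONE live object of the callers' frames (above the return address: `Frame.callers`) or of
`A.2` (off the stack region). What lets a load of a field of `*f` be read through a push or a spill. -/
theorem obj_above {u₀ : State} {g : Ghost} {pc : Word} {A : Arena × List Obj} {v : State} (hfr : Frame u₀ g pc A v)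
    (hh : g.Hand A) : g.f + 1808 ≤ 0x700000 ∨ 0x800000 ≤ g.f ∨ g.RA + 8 ≤ g.f := by
  obtain ⟨o, ho, h1, h2⟩ := hh.obj
  simp only [voff] at h2
  rcases List.mem_append.mp ho with hs | hoth
  · right
    right
    unfold stackObjs at hs
    obtain ⟨bF, hbF, hin⟩ := List.mem_flatMap.mp hs
    have hmem : bF ∈ g.frames' := List.mem_cons_of_mem _ hbF
    obtain ⟨k1, k2, _, _, _⟩ := hfr.shadow.stack.active bF hmem
    have hg := (FrameLayout.objsAt_gran k1 k2 hin).1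
    have hc := hfr.callers bF hbF
    have h8 := hfr.ra.1
    have e1 : o.gLo = o.base / 8 := rfl
    omega
  · have hoff := hfr.shadow.off o hoth
    unfold OffStack at hoff
    omega

/-! ### Carrying the assertions over a change of memory -/

/-- **`SDw … 1` over a change of memory that leaves `*f`, the shadow and the frame constants `[R+8, R+28H)` alone** (a push, the
return address of a call, a store into an arena block, a spill to another slot): every clause reads one of the three. -/
theorem sdw_carry {len : Nat} {A : Arena × List Obj} {Blk : Block → Prop} {Live : Nat → Prop} {mem mem' : Mem} {f R : Nat}
    (h : SDw len 1 A Blk Live mem f R) (hobj : (objBlock f).Same mem mem') (hsh : Mem.EqOn 0xC00000 0xE00000 mem mem')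
    (hfrm : Mem.EqOn (R + 8) (R + 0x28) mem mem') (hR : R + 0x28 ≤ 2 ^ 64) : SDw len 1 A Blk Live mem' f R := by
  have hobr := h.bits.OBR
  simp only [voff] at hobr
  have hf : f + Off.sizeof.stb_vorbis ≤ 2 ^ 64 := by
    simp only [voff]
    omega
  have hs : ObjSame f mem mem' := ObjSame.of_same hobj hf
  have he : Mem.EqOn f (f + 1808) mem mem' := hobj
  refine ⟨h.env.eqOn hsh, h.frame.frame hfrm hR, h.arena.frame_obj hf hobj, h.setups,
    h.bits.frame_fields (Bits.SameFields.of_same hobj), ?_, ?_, ?_, ?_, ?_⟩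
  · have h1 := h.first
    simp only [vacc, voff] at h1 ⊢
    rw [he.u8 _ (by omega) (by omega) (by omega)]
    exact h1
  · have h1 := h.discard0
    simp only [vacc, voff] at h1 ⊢
    rw [he.i32 _ (by omega) (by omega) (by omega)]
    exact h1
  · intro hk
    exact (h.header hk).frame hs
  · intro hk
    omega
  · have h1 := h.rest
    unfold RestZero at h1 ⊢
    apply h1.frame
    · simp only [restFrom, voff] at *
      exact he.mono (by omega) (by omega)
    · simp only [voff]
      omega

/-- **The common part `Frame` at a later state `w`** (same ghost arena): the live part of the stack `[R, RA + 8)` reads the same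
(the frame constants, the saved registers, the return address), no shadow byte was written, the text and `log2_4` are as they
were, and the footprint so far is the function's. Every memory-independent field is carried. -/
theorem frame_carry {u₀ : State} {g : Ghost} {pc pc' : Word} {A : Arena × List Obj} {v w : State} (h : Frame u₀ g pc A v)
    (hrip : w.rip = pc') (hrsp : w.reg .rsp = addr g.R) (hup : Mem.EqOn g.R (g.RA + 8) v.mem w.mem)
    (hcode : CodeOK u₀ w.mem) (hinv : abiInv w) (hsh : ShadowUntouched v.mem w.mem) (hlog : Log2_4In w.mem)
    (hsame : Mem.SameExcept (footprint g) g.e.mem w.mem) : Frame u₀ g pc' A w := by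
  have h1 := h.r_eq.1
  have h2 := h.ra.2.2
  simp only [steady] at h1
  refine ⟨h.entry, hrip, hrsp, ?_, ?_, ?_, ?_, ?_, ?_, ?_, ?_, hcode, hinv, h.shadow.untouched hsh, h.offText, h.ext, h.callers,
    hlog, hsame⟩
  · rw [hup.u64 _ (by omega) (by omega) (by omega)]
    exact h.shadowIdx
  · rw [hup.u64 _ (by omega) (by omega) (by omega)]
    exact h.saved_rbx
  · rw [hup.u64 _ (by omega) (by omega) (by omega)]
    exact h.saved_rbp
  · rw [hup.u64 _ (by omega) (by omega) (by omega)]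
    exact h.saved_r12
  · rw [hup.u64 _ (by omega) (by omega) (by omega)]
    exact h.saved_r13
  · rw [hup.u64 _ (by omega) (by omega) (by omega)]
    exact h.saved_r14
  · rw [hup.u64 _ (by omega) (by omega) (by omega)]
    exact h.saved_r15
  · rw [hup.u64 _ (by omega) (by omega) (by omega)]
    exact h.saved_ra

/-- The memory changed only in the dead part of the function's stack, `[RA − 1888, R)`: return addresses of calls, the callees'
frames. -/
def Below (g : Ghost) (mem mem' : Mem) : Prop := Mem.SameExcept [⟨g.RA - 1888, g.R⟩] mem mem'

/-- Off the dead stack nothing changed. -/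
theorem Below.eqOn {g : Ghost} {mem mem' : Mem} (h : Below g mem mem') (lo hi : Nat) (hd : hi ≤ g.RA - 1888 ∨ g.R ≤ lo) :
    Mem.EqOn lo hi mem mem' := by
  apply Mem.SameExcept.eqOn h
  intro w hw
  have e : w = ⟨g.RA - 1888, g.R⟩ := List.mem_singleton.mp hw
  subst e
  exact hd

/-- **`Frame` after stores into the dead stack.** -/
theorem Below.frame {u₀ : State} {g : Ghost} {pc pc' : Word} {A : Arena × List Obj} {v w : State} (h : Frame u₀ g pc A v)
    (hb : Below g v.mem w.mem) (hrip : w.rip = pc') (hrsp : w.reg .rsp = addr g.R) (hcode : CodeOK u₀ w.mem)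
    (hinv : abiInv w) : Frame u₀ g pc' A w := by
  have h1 := h.r_eq.1
  have h2 := h.ra.2.2
  have h3 := h.ra.2.1
  simp only [steady, depth] at h1 h3
  refine frame_carry h hrip hrsp (hb.eqOn _ _ (Or.inr (Nat.le_refl _))) hcode hinv (hb.eqOn _ _ (Or.inr (by omega))) ?_ ?_
  · intro i hi
    have e := hb.eqOn 0x120640 0x120650 (Or.inl (by omega))
    rw [e.readLE _ 1 ?_ ?_ ?_]
    · exact h.sh7 i hi
    · simp only [Vorbis.Globals.log2_4]
      rw [UInt64.toNat_ofNat']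
      omega
    · simp only [Vorbis.Globals.log2_4]
      rw [UInt64.toNat_ofNat']
      omega
    · simp only [Vorbis.Globals.log2_4]
      rw [UInt64.toNat_ofNat']
      omega
  · refine h.same.step_same hb ?_
    intro w' hw' a ha1 ha2
    have e : w' = ⟨g.RA - 1888, g.R⟩ := List.mem_singleton.mp hw'
    subst e
    refine ⟨⟨g.RA - depth, g.RA⟩, List.mem_cons_self, ?_, ?_⟩
    · simp only [depth] at ha1 ⊢
      exact ha1
    · simp only [] at ha2 ⊢
      omega

/-- **`SDw … 1` after stores into the dead stack** (`*f` lies off the function's stack: `obj_above`). -/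
theorem Below.sdw {u₀ : State} {g : Ghost} {pc : Word} {A : Arena × List Obj} {v : State} {mem' : Mem} (hfr : Frame u₀ g pc A v)
    (hh : g.Hand A) (h : SDw g.len 1 A (g.Blk A) (g.Live A) v.mem g.f g.R) (hb : Below g v.mem mem') :
    SDw g.len 1 A (g.Blk A) (g.Live A) mem' g.f g.R := by
  have h1 := hfr.r_eq.1
  have h2 := hfr.ra.2.2
  have h3 := hfr.ra.2.1
  simp only [steady, depth] at h1 h3
  have hab := obj_above hfr hh
  refine sdw_carry h ?_ (hb.eqOn _ _ (Or.inr (by omega))) (hb.eqOn _ _ (Or.inr (by omega))) (by omega)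
  simp only [vblock, voff]
  apply hb.eqOn
  omega

/-- **CM1 – CM3 after stores into the dead stack**: the table of comment pointers is an arena block, off the stack. -/
theorem Below.comment {u₀ : State} {g : Ghost} {pc : Word} {A : Arena × List Obj} {v : State} {mem' : Mem} {n : Nat}
    (hfr : Frame u₀ g pc A v) (hh : g.Hand A) (h : SDw g.len 1 A (g.Blk A) (g.Live A) v.mem g.f g.R)
    (hc : CommentOK A.1.Blk v.mem g.f n) (hb : Below g v.mem mem') : CommentOK A.1.Blk mem' g.f n := by
  have h1 := hfr.r_eq.1
  have h2 := hfr.ra.2.2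
  have h3 := hfr.ra.2.1
  simp only [steady, depth] at h1 h3
  have hab := obj_above hfr hh
  have hobr := h.bits.OBR
  simp only [voff] at hobr
  have hobj : (objBlock g.f).Same v.mem mem' := by
    simp only [vblock, voff]
    apply hb.eqOn
    omega
  refine hc.frame (ObjSame.of_same hobj (by simp only [voff]; omega)) ?_
  intro B hB
  have hblk := hc.reads_blk hB
  have hoff := h.arena.blk_off_stack hblk
  refine Block.Kept.of_sameExcept hb ?_ (h.arena.blkOK.no_wrap hblk)
  intro w hw
  have e : w = ⟨g.RA - 1888, g.R⟩ := List.mem_singleton.mp hw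
  subst e
  simp only []
  omega

/-- What a packet reader (get8_packet, get32_packet: `Reader.winsPacket f`) or `error` (`[f+140, f+144)`) may change, seen from a
cut point of start_decoder: the dead stack `[RA − 1888, R)` and six windows of `*f`. -/
def RdSpans (g : Ghost) : List Span :=
  [⟨g.RA - 1888, g.R⟩, ⟨g.f + 48, g.f + 56⟩, ⟨g.f + 84, g.f + 96⟩, ⟨g.f + 136, g.f + 144⟩, ⟨g.f + 1484, g.f + 1749⟩,
    ⟨g.f + 1752, g.f + 1764⟩, ⟨g.f + 1768, g.f + 1784⟩]

/-- The memory changed only where a packet reader writes. -/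
def Rd (g : Ghost) (mem mem' : Mem) : Prop := Mem.SameExcept (RdSpans g) mem mem'

/-- Off the dead stack and off the six windows nothing changed. -/
theorem Rd.eqOn {g : Ghost} {mem mem' : Mem} (h : Rd g mem mem') (lo hi : Nat) (h1 : hi ≤ g.RA - 1888 ∨ g.R ≤ lo)
    (h2 : hi ≤ g.f + 48 ∨ g.f + 1784 ≤ lo ∨ (g.f + 56 ≤ lo ∧ hi ≤ g.f + 84) ∨ (g.f + 96 ≤ lo ∧ hi ≤ g.f + 136) ∨
      (g.f + 144 ≤ lo ∧ hi ≤ g.f + 1484) ∨ (g.f + 1749 ≤ lo ∧ hi ≤ g.f + 1752) ∨ (g.f + 1764 ≤ lo ∧ hi ≤ g.f + 1768)) :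
    Mem.EqOn lo hi mem mem' := by
  apply Mem.SameExcept.eqOn h
  intro w hw
  simp only [RdSpans, List.mem_cons, List.mem_nil_iff, or_false] at hw
  rcases hw with rfl | rfl | rfl | rfl | rfl | rfl | rfl <;> simp only [] <;> omega

/-- The numbers every `Rd` lemma needs: where the frame and `*f` are. -/
theorem where_all {u₀ : State} {g : Ghost} {pc : Word} {A : Arena × List Obj} {v : State} (hfr : Frame u₀ g pc A v)
    (hh : g.Hand A) (h : SDw g.len 1 A (g.Blk A) (g.Live A) v.mem g.f g.R) :
    g.R + 1480 = g.RA ∧ 0x700000 + 1888 ≤ g.RA ∧ g.RA + 8 ≤ 0x800000 ∧ 0x400000 ≤ g.f ∧ g.f + 1808 ≤ 0xC00000 ∧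
      (g.f + 1808 ≤ 0x700000 ∨ 0x800000 ≤ g.f ∨ g.RA + 8 ≤ g.f) := by
  have h1 := hfr.r_eq.1
  have h2 := hfr.ra.2.2
  have h3 := hfr.ra.2.1
  simp only [steady, depth] at h1 h3
  have hab := obj_above hfr hh
  have hobr := h.bits.OBR
  simp only [voff] at hobr
  exact ⟨h1, h3, h2, hobr.1, hobr.2, hab⟩

/-- **`Frame` after a packet reader.** -/
theorem Rd.frame {u₀ : State} {g : Ghost} {pc pc' : Word} {A : Arena × List Obj} {v w : State} (hfr : Frame u₀ g pc A v)
    (hh : g.Hand A) (h : SDw g.len 1 A (g.Blk A) (g.Live A) v.mem g.f g.R) (hb : Rd g v.mem w.mem)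
    (hun : ShadowUntouched v.mem w.mem) (hrip : w.rip = pc') (hrsp : w.reg .rsp = addr g.R) (hcode : CodeOK u₀ w.mem)
    (hinv : abiInv w) : Frame u₀ g pc' A w := by
  obtain ⟨k1, k2, k3, k4, k5, k6⟩ := where_all hfr hh h
  refine frame_carry hfr hrip hrsp (hb.eqOn _ _ (Or.inr (Nat.le_refl _)) (by omega)) hcode hinv hun ?_ ?_
  · intro i hi
    have e := hb.eqOn 0x120640 0x120650 (Or.inl (by omega)) (Or.inl (by omega))
    rw [e.readLE _ 1 ?_ ?_ ?_]
    · exact hfr.sh7 i hi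
    · simp only [Vorbis.Globals.log2_4]
      rw [UInt64.toNat_ofNat']
      omega
    · simp only [Vorbis.Globals.log2_4]
      rw [UInt64.toNat_ofNat']
      omega
    · simp only [Vorbis.Globals.log2_4]
      rw [UInt64.toNat_ofNat']
      omega
  · refine hfr.same.step_same hb ?_
    intro w' hw' a ha1 ha2
    simp only [RdSpans, List.mem_cons, List.mem_nil_iff, or_false] at hw'
    have hobjspan : ∃ w'' ∈ footprint g, w''.lo ≤ g.f ∧ g.f + 1808 ≤ w''.hi := by
      refine ⟨(objBlock (g.e.reg .rdi).toNat).span, ?_, ?_, ?_⟩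
      · simp only [footprint, writes, List.mem_cons, true_or, or_true]
      · exact Nat.le_refl _
      · show g.f + 1808 ≤ g.f + Off.sizeof.stb_vorbis
        simp only [voff]
        exact Nat.le_refl _
    obtain ⟨wo, hwo, ho1, ho2⟩ := hobjspan
    rcases hw' with rfl | rfl | rfl | rfl | rfl | rfl | rfl
    · refine ⟨⟨g.RA - depth, g.RA⟩, List.mem_cons_self, ?_, ?_⟩
      · simp only [depth] at ha1 ⊢
        exact ha1
      · simp only [] at ha2 ⊢
        omega
    all_goals
      refine ⟨wo, hwo, ?_, ?_⟩
      · simp only [] at ha1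
        omega
      · simp only [] at ha2
        omega

/-- **`SDw … 1` after a packet reader**, `Bits f` from the callee's post. -/
theorem Rd.sdw {u₀ : State} {g : Ghost} {pc : Word} {A : Arena × List Obj} {v : State} {mem' : Mem} (hfr : Frame u₀ g pc A v)
    (hh : g.Hand A) (h : SDw g.len 1 A (g.Blk A) (g.Live A) v.mem g.f g.R) (hb : Rd g v.mem mem')
    (hun : ShadowUntouched v.mem mem') (hbits : Bits (g.Blk A) g.len mem' g.f) :
    SDw g.len 1 A (g.Blk A) (g.Live A) mem' g.f g.R := by
  obtain ⟨k1, k2, k3, k4, k5, k6⟩ := where_all hfr hh h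
  have hf : g.f + Off.sizeof.stb_vorbis ≤ 2 ^ 64 := by
    simp only [voff]
    omega
  refine ⟨h.env.eqOn hun, h.frame.frame (hb.eqOn _ _ (Or.inr (by omega)) (by omega)) (by omega), ?_, h.setups, hbits,
    ?_, ?_, ?_, ?_, ?_⟩
  · apply h.arena.frame hf
    simp only [voff]
    exact hb.eqOn _ _ (by omega) (by omega)
  · have h1 := h.first
    simp only [vacc, voff] at h1 ⊢
    rw [(hb.eqOn (g.f + 1749) (g.f + 1750) (by omega) (by omega)).u8 _ (by omega) (by omega) (by omega)]
    exact h1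
  · have h1 := h.discard0
    simp only [vacc, voff] at h1 ⊢
    rw [(hb.eqOn (g.f + 1784) (g.f + 1788) (by omega) (by omega)).i32 _ (by omega) (by omega) (by omega)]
    exact h1
  · intro hk
    apply (h.header hk).transfer
    apply ObjEq.of_eqOn
    · intro w hw
      simp only [HeaderOK.wins, List.mem_cons, List.mem_nil_iff, or_false] at hw
      rcases hw with rfl | rfl <;> simp only [] <;> omega
    · intro w hw
      simp only [HeaderOK.wins, List.mem_cons, List.mem_nil_iff, or_false] at hw
      rcases hw with rfl | rfl
      · exact hb.eqOn _ _ (by omega) (by simp only []; omega)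
      · exact hb.eqOn _ _ (by omega) (by simp only []; omega)
  · intro hk
    omega
  · have h1 := h.rest
    have e : restFrom 1 = 160 := rfl
    unfold RestZero at h1 ⊢
    rw [e] at h1 ⊢
    apply h1.frame
    · simp only [voff]
      exact hb.eqOn _ _ (by omega) (by omega)
    · simp only [voff]
      omega

/-- **CM1 – CM3 after a packet reader**: the window `[24, 48)` of `*f` and the table (an arena block: off the stack, off `*f`). -/
theorem Rd.comment {u₀ : State} {g : Ghost} {pc : Word} {A : Arena × List Obj} {v : State} {mem' : Mem} {n : Nat}
    (hfr : Frame u₀ g pc A v) (hh : g.Hand A) (h : SDw g.len 1 A (g.Blk A) (g.Live A) v.mem g.f g.R)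
    (hc : CommentOK A.1.Blk v.mem g.f n) (hb : Rd g v.mem mem') : CommentOK A.1.Blk mem' g.f n := by
  obtain ⟨k1, k2, k3, k4, k5, k6⟩ := where_all hfr hh h
  apply hc.transfer (Blk' := A.1.Blk)
  · apply ObjEq.of_eqOn
    · intro w hw
      simp only [CommentOK.wins, List.mem_singleton] at hw
      subst hw
      simp only []
      omega
    · intro w hw
      simp only [CommentOK.wins, List.mem_singleton] at hw
      subst hw
      exact hb.eqOn _ _ (by omega) (by simp only []; omega)
  · intro B hB
    have hblk := hc.reads_blk hB
    have hoff := h.arena.blk_off_stack hblk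
    have hin := arena_inside h.arena hblk
    have hout := hh.objOut
    simp only [voff] at hout
    refine ⟨hb.eqOn _ _ (by omega) (by omega), h.arena.blkOK.no_wrap hblk⟩
  · intro B _ hB
    exact hB

/-- **`AtERR` after `error(f, e)` returned 0** (the two stubs of the segment): `error` wrote `f->error` only (inside the reader's
window `[f+136, f+144)`), so `Frame`, `SDw` and CM2 (= H1) are carried; `Bits` reads none of the four bytes. -/
theorem atERR_of_error {u₀ : State} {g : Ghost} {pc : Word} {A : Arena × List Obj} {n : Nat} {v r : State}
    (hfr : Frame u₀ g pc A v) (hh : g.Hand A) (hsd : SDw g.len 1 A (g.Blk A) (g.Live A) v.mem g.f g.R)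
    (hcom : CommentOK A.1.Blk v.mem g.f n)
    (hs : Mem.SameExcept [⟨g.RA - 1888, g.R⟩, ⟨g.f + 140, g.f + 144⟩] v.mem r.mem) (hun : ShadowUntouched v.mem r.mem)
    (hrip : r.rip = pc_ERR) (hrsp : r.reg .rsp = addr g.R) (hcode : CodeOK u₀ r.mem) (hinv : abiInv r)
    (hrax : (r.reg .rax).toNat % 2 ^ 32 = 0) : AtERR u₀ g r := by
  obtain ⟨k1, k2, k3, k4, k5, k6⟩ := where_all hfr hh hsd
  have hrd : Rd g v.mem r.mem := by
    refine hs.mono ?_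
    intro w hw a ha1 ha2
    simp only [List.mem_cons, List.mem_nil_iff, or_false] at hw
    rcases hw with rfl | rfl
    · exact ⟨⟨g.RA - 1888, g.R⟩, List.mem_cons_self, ha1, ha2⟩
    · refine ⟨⟨g.f + 136, g.f + 144⟩, ?_, ?_, ?_⟩
      · simp only [RdSpans, List.mem_cons, true_or, or_true]
      · simp only [] at ha1 ⊢
        omega
      · exact ha2
  have hbits : Bits (g.Blk A) g.len r.mem g.f := by
    apply hsd.bits.frame_fields
    apply Bits.SameFields.of_sameExcept hs
    all_goals
      intro w hw
      simp only [List.mem_cons, List.mem_nil_iff, or_false] at hw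
      rcases hw with rfl | rfl <;> simp only [] <;> omega
  have hsd' := hrd.sdw hfr hh hsd hun hbits
  have hcom' := hrd.comment hfr hh hsd hcom
  have h1 : H1 (g.Blk A) r.mem g.f := by
    rcases hcom'.CM2 with h0 | h2
    · exact Or.inl h0
    · exact Or.inr (up g A _ h2.2)
  exact ⟨A, hrd.frame hfr hh hsd hun hrip hrsp hcode hinv, hh, Or.inl ⟨hrax, SDw.failed hsd' (by omega) h1⟩⟩

/-! ### Over a store inside an arena block -/

/-- The memory changed only in the dead stack and inside the arena block `C` (the pointer store into the table of comment pointers,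
a byte store into a string block — plus the return addresses of the check calls before it). -/
def InBlk (g : Ghost) (C : Block) (mem mem' : Mem) : Prop := Mem.SameExcept [⟨g.RA - 1888, g.R⟩, C.span] mem mem'

/-- Off the dead stack and off the block nothing changed. -/
theorem InBlk.eqOn {g : Ghost} {C : Block} {mem mem' : Mem} (h : InBlk g C mem mem') (lo hi : Nat)
    (h1 : hi ≤ g.RA - 1888 ∨ g.R ≤ lo) (h2 : hi ≤ C.base ∨ C.base + C.size ≤ lo) : Mem.EqOn lo hi mem mem' := by
  apply Mem.SameExcept.eqOn h
  intro w hw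
  simp only [List.mem_cons, List.mem_nil_iff, or_false] at hw
  rcases hw with rfl | rfl
  · exact h1
  · simp only [vblock]
    exact h2

/-- Where an arena block is: inside the arena's buffer, off the stack region, off `*f`, below the shadow, off `log2_4`. -/
theorem blk_where7 {u₀ : State} {g : Ghost} {pc : Word} {A : Arena × List Obj} {v : State} (hfr : Frame u₀ g pc A v)
    (hh : g.Hand A) (h : SDw g.len 1 A (g.Blk A) (g.Live A) v.mem g.f g.R) {C : Block} (hC : A.1.Blk C) :
    (C.base + C.size ≤ 0x700000 ∨ 0x800000 ≤ C.base) ∧ (C.base + C.size ≤ g.f ∨ g.f + 1808 ≤ C.base) ∧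
      C.base + C.size ≤ 0xC00000 ∧ (C.base + C.size ≤ 0x120640 ∨ 0x120650 ≤ C.base) ∧
      g.A0.1.B ≤ C.base ∧ C.base + C.size ≤ g.A0.1.B + g.A0.1.L := by
  have hoff := h.arena.blk_off_stack hC
  have hin := arena_inside h.arena hC
  have hout := hh.objOut
  simp only [voff] at hout
  have hb := h.arena.bounds
  have hlog := hh.outside ⟨0x120640, 16⟩ (by
    simp only [fixedBlocks, globalBlocks, List.mem_cons, true_or, or_true])
  simp only [] at hlog
  have eB := hfr.ext.B
  have eL := hfr.ext.L
  refine ⟨hoff, by omega, by omega, by omega, by omega, by omega⟩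

/-- **`Frame` after stores inside an arena block.** -/
theorem InBlk.frame {u₀ : State} {g : Ghost} {pc pc' : Word} {A : Arena × List Obj} {v w : State} {C : Block}
    (hfr : Frame u₀ g pc A v) (hh : g.Hand A) (h : SDw g.len 1 A (g.Blk A) (g.Live A) v.mem g.f g.R) (hC : A.1.Blk C)
    (hb : InBlk g C v.mem w.mem) (hrip : w.rip = pc') (hrsp : w.reg .rsp = addr g.R) (hcode : CodeOK u₀ w.mem)
    (hinv : abiInv w) : Frame u₀ g pc' A w := by
  obtain ⟨k1, k2, k3, k4, k5, k6⟩ := where_all hfr hh h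
  obtain ⟨c1, c2, c3, c4, c5, c6⟩ := blk_where7 hfr hh h hC
  refine frame_carry hfr hrip hrsp (hb.eqOn _ _ (Or.inr (Nat.le_refl _)) (by omega)) hcode hinv
    (hb.eqOn _ _ (Or.inr (by omega)) (by omega)) ?_ ?_
  · intro i hi
    have e := hb.eqOn 0x120640 0x120650 (Or.inl (by omega)) (by omega)
    rw [e.readLE _ 1 ?_ ?_ ?_]
    · exact hfr.sh7 i hi
    · simp only [Vorbis.Globals.log2_4]
      rw [UInt64.toNat_ofNat']
      omega
    · simp only [Vorbis.Globals.log2_4]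
      rw [UInt64.toNat_ofNat']
      omega
    · simp only [Vorbis.Globals.log2_4]
      rw [UInt64.toNat_ofNat']
      omega
  · refine hfr.same.step_same hb ?_
    intro w' hw' a ha1 ha2
    simp only [List.mem_cons, List.mem_nil_iff, or_false] at hw'
    rcases hw' with rfl | rfl
    · refine ⟨⟨g.RA - depth, g.RA⟩, List.mem_cons_self, ?_, ?_⟩
      · simp only [depth] at ha1 ⊢
        exact ha1
      · simp only [] at ha2 ⊢
        omega
    · refine ⟨⟨g.A0.1.B, g.A0.1.B + g.A0.1.L⟩, ?_, ?_, ?_⟩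
      · simp only [footprint, writes, List.mem_cons, true_or, or_true]
      · simp only [vblock] at ha1 ⊢
        omega
      · simp only [vblock] at ha2 ⊢
        omega

/-- **`SDw … 1` after stores inside an arena block**: `*f`, the shadow and the frame constants are elsewhere. -/
theorem InBlk.sdw {u₀ : State} {g : Ghost} {pc : Word} {A : Arena × List Obj} {v : State} {mem' : Mem} {C : Block}
    (hfr : Frame u₀ g pc A v) (hh : g.Hand A) (h : SDw g.len 1 A (g.Blk A) (g.Live A) v.mem g.f g.R) (hC : A.1.Blk C)
    (hb : InBlk g C v.mem mem') : SDw g.len 1 A (g.Blk A) (g.Live A) mem' g.f g.R := by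
  obtain ⟨k1, k2, k3, k4, k5, k6⟩ := where_all hfr hh h
  obtain ⟨c1, c2, c3, c4, c5, c6⟩ := blk_where7 hfr hh h hC
  refine sdw_carry h ?_ (hb.eqOn _ _ (Or.inr (by omega)) (by omega)) (hb.eqOn _ _ (Or.inr (by omega)) (by omega)) (by omega)
  simp only [vblock, voff]
  exact hb.eqOn _ _ (by omega) (by omega)

/-- **CM1 – CM3 after stores inside an arena block that is NOT the table of comment pointers** (a string block). -/
theorem InBlk.comment {u₀ : State} {g : Ghost} {pc : Word} {A : Arena × List Obj} {v : State} {mem' : Mem} {C : Block} {n : Nat}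
    (hfr : Frame u₀ g pc A v) (hh : g.Hand A) (h : SDw g.len 1 A (g.Blk A) (g.Live A) v.mem g.f g.R) (hC : A.1.Blk C)
    (hc : CommentOK A.1.Blk v.mem g.f n) (hne : C.base ≠ stb_vorbis.comment_list v.mem g.f) (hb : InBlk g C v.mem mem') :
    CommentOK A.1.Blk mem' g.f n := by
  obtain ⟨k1, k2, k3, k4, k5, k6⟩ := where_all hfr hh h
  obtain ⟨c1, c2, c3, c4, c5, c6⟩ := blk_where7 hfr hh h hC
  have hobj : (objBlock g.f).Same v.mem mem' := by
    simp only [vblock, voff]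
    exact hb.eqOn _ _ (by omega) (by omega)
  refine hc.frame (ObjSame.of_same hobj (by simp only [voff]; omega)) ?_
  intro B hB
  have hblk := hc.reads_blk hB
  obtain ⟨b1, _, _, _, _, _⟩ := blk_where7 hfr hh h hblk
  have hbase : B.base = stb_vorbis.comment_list v.mem g.f := by
    cases hB
    rfl
  have hd : B.disjoint C := h.arena.blkOK.disjoint_of_base hblk hC (by rw [hbase]; exact fun e => hne e.symm)
  simp only [vblock] at hd
  exact ⟨hb.eqOn _ _ (by omega) (by omega), h.arena.blkOK.no_wrap hblk⟩

/-- **THE STEP OF CM3** (line 3697, the store `f->comment_list[i] = p`): the memory changed in the dead stack and in the 8 bytes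
of slot `i` of the table, which now hold `p`, the base of an arena block of EXACTLY `len + 1` bytes: CM1 – CM3 hold up to `i + 1`
(slot `i` was NULL before: FIX 12; the words above stay NULL). With `p = 0` and the counter unchanged: `comment_store_null`. -/
theorem comment_store_slot {u₀ : State} {g : Ghost} {pc : Word} {A : Arena × List Obj} {v : State} {mem' : Mem} {i len p : Nat}
    (hfr : Frame u₀ g pc A v) (hh : g.Hand A) (h : SDw g.len 1 A (g.Blk A) (g.Live A) v.mem g.f g.R)
    (hc : CommentOK A.1.Blk v.mem g.f i) (hlt : (i : Int) < stb_vorbis.comment_list_length v.mem g.f)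
    (hb : InBlk g ⟨stb_vorbis.comment_list_at v.mem g.f i, 8⟩ v.mem mem')
    (hslot : mem'.ptr (stb_vorbis.comment_list_at v.mem g.f i) = p) (hp : A.1.Blk ⟨p, len + 1⟩)
    (hlen : len < 2147483647) : CommentOK A.1.Blk mem' g.f (i + 1) := by
  obtain ⟨k1, k2, k3, k4, k5, k6⟩ := where_all hfr hh h
  -- the table block
  have htab : A.1.Blk ⟨stb_vorbis.comment_list v.mem g.f, 8 * (stb_vorbis.comment_list_length v.mem g.f).toNat⟩ := by
    rcases hc.CM2 with h0 | h1
    · omega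
    · exact h1.2
  have hn : stb_vorbis.comment_list_length v.mem g.f ≤ 0x0FFFFFFF := by
    rcases hc.CM2 with h0 | h1
    · omega
    · exact h1.1
  obtain ⟨c1, c2, c3, c4, c5, c6⟩ := blk_where7 hfr hh h htab
  simp only [] at c1 c2 c3
  have hat : ∀ j, stb_vorbis.comment_list_at v.mem g.f j = stb_vorbis.comment_list v.mem g.f + 8 * j := fun j => rfl
  -- `*f` reads the same
  have he : Mem.EqOn g.f (g.f + 1808) v.mem mem' := by
    apply hb.eqOn _ _ (by omega)
    simp only [hat]
    omega
  have e_v : stb_vorbis.vendor mem' g.f = stb_vorbis.vendor v.mem g.f := by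
    simp only [vacc, voff]
    exact he.ptr _ (by omega) (by omega) (by omega)
  have e_n : stb_vorbis.comment_list_length mem' g.f = stb_vorbis.comment_list_length v.mem g.f := by
    simp only [vacc, voff]
    exact he.i32 _ (by omega) (by omega) (by omega)
  have e_c : stb_vorbis.comment_list mem' g.f = stb_vorbis.comment_list v.mem g.f := by
    simp only [vacc, voff]
    exact he.ptr _ (by omega) (by omega) (by omega)
  have e_at : ∀ j, stb_vorbis.comment_list_at mem' g.f j = stb_vorbis.comment_list_at v.mem g.f j := by
    intro j
    show stb_vorbis.comment_list mem' g.f + 8 * j = stb_vorbis.comment_list v.mem g.f + 8 * j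
    rw [e_c]
  -- the other slots read the same
  have hother : ∀ j, j ≠ i → (j : Int) < stb_vorbis.comment_list_length v.mem g.f →
      mem'.ptr (stb_vorbis.comment_list_at v.mem g.f j) = v.mem.ptr (stb_vorbis.comment_list_at v.mem g.f j) := by
    intro j hj hjn
    have e := hb.eqOn (stb_vorbis.comment_list_at v.mem g.f j) (stb_vorbis.comment_list_at v.mem g.f j + 8)
      (by simp only [hat]; omega) (by simp only [hat]; omega)
    exact e.ptr _ (Nat.le_refl _) (Nat.le_refl _) (by simp only [hat]; omega)
  refine ⟨?_, ?_, ⟨?_, ?_⟩, ?_⟩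
  · -- CM1
    unfold CM1
    rw [e_v]
    exact hc.CM1
  · -- CM2
    unfold CM2
    rw [e_n, e_c]
    exact hc.CM2
  · -- CM3, the strings
    intro j hj
    rw [e_at]
    by_cases hji : j = i
    · subst hji
      rw [hslot]
      exact ⟨len, hlen, hp⟩
    · rw [hother j hji (by omega)]
      exact hc.CM3.1 j (by omega)
  · -- CM3, the NULL words above
    intro j hj hjn
    rw [e_n] at hjn
    rw [e_at, hother j (by omega) hjn]
    exact hc.CM3.2 j (by omega) hjn
  · left
    rw [e_n]
    omega

/-! ### The end of an iteration: the terminator and `++i` -/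

/-- `frame_carry` when the loop counter's slot `[R+18H, R+1CH)` was written too: the frame constant `[R+8]` and the saved
registers / return address `[R+598H, RA+8)` read the same. -/
theorem frame_carry2 {u₀ : State} {g : Ghost} {pc pc' : Word} {A : Arena × List Obj} {v w : State} (h : Frame u₀ g pc A v)
    (hrip : w.rip = pc') (hrsp : w.reg .rsp = addr g.R) (hidx : Mem.EqOn (g.R + 8) (g.R + 16) v.mem w.mem)
    (hup : Mem.EqOn (g.R + 0x598) (g.RA + 8) v.mem w.mem)
    (hcode : CodeOK u₀ w.mem) (hinv : abiInv w) (hsh : ShadowUntouched v.mem w.mem) (hlog : Log2_4In w.mem)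
    (hsame : Mem.SameExcept (footprint g) g.e.mem w.mem) : Frame u₀ g pc' A w := by
  have h1 := h.r_eq.1
  have h2 := h.ra.2.2
  simp only [steady] at h1
  refine ⟨h.entry, hrip, hrsp, ?_, ?_, ?_, ?_, ?_, ?_, ?_, ?_, hcode, hinv, h.shadow.untouched hsh, h.offText, h.ext, h.callers,
    hlog, hsame⟩
  · rw [hidx.u64 _ (by omega) (by omega) (by omega)]
    exact h.shadowIdx
  · rw [hup.u64 _ (by omega) (by omega) (by omega)]
    exact h.saved_rbx
  · rw [hup.u64 _ (by omega) (by omega) (by omega)]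
    exact h.saved_rbp
  · rw [hup.u64 _ (by omega) (by omega) (by omega)]
    exact h.saved_r12
  · rw [hup.u64 _ (by omega) (by omega) (by omega)]
    exact h.saved_r13
  · rw [hup.u64 _ (by omega) (by omega) (by omega)]
    exact h.saved_r14
  · rw [hup.u64 _ (by omega) (by omega) (by omega)]
    exact h.saved_r15
  · rw [hup.u64 _ (by omega) (by omega) (by omega)]
    exact h.saved_ra

/-- `sdw_carry` with the frame constants given for the new memory (the loop counter's slot lies between them). -/
theorem sdw_carry_c {len : Nat} {A : Arena × List Obj} {Blk : Block → Prop} {Live : Nat → Prop} {mem mem' : Mem} {f R : Nat}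
    (h : SDw len 1 A Blk Live mem f R) (hobj : (objBlock f).Same mem mem') (hsh : Mem.EqOn 0xC00000 0xE00000 mem mem')
    (hc : SDFrameConsts 1 mem' R) : SDw len 1 A Blk Live mem' f R := by
  have hobr := h.bits.OBR
  simp only [voff] at hobr
  have hf : f + Off.sizeof.stb_vorbis ≤ 2 ^ 64 := by
    simp only [voff]
    omega
  have hs : ObjSame f mem mem' := ObjSame.of_same hobj hf
  have he : Mem.EqOn f (f + 1808) mem mem' := hobj
  refine ⟨h.env.eqOn hsh, hc, h.arena.frame_obj hf hobj, h.setups,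
    h.bits.frame_fields (Bits.SameFields.of_same hobj), ?_, ?_, ?_, ?_, ?_⟩
  · have h1 := h.first
    simp only [vacc, voff] at h1 ⊢
    rw [he.u8 _ (by omega) (by omega) (by omega)]
    exact h1
  · have h1 := h.discard0
    simp only [vacc, voff] at h1 ⊢
    rw [he.i32 _ (by omega) (by omega) (by omega)]
    exact h1
  · intro hk
    exact (h.header hk).frame hs
  · intro hk
    omega
  · have h1 := h.rest
    have e : restFrom 1 = 160 := rfl
    unfold RestZero at h1 ⊢
    rw [e] at h1 ⊢
    apply h1.frame
    · simp only [voff]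
      exact he.mono (by omega) (by omega)
    · simp only [voff]
      omega

/-- The end of an iteration of loop 3695: the memory changed in the dead stack, inside the string block `C` (the terminator) and in
the loop counter's slot `[R+18H, R+1CH)` (`++i`). -/
def Ex (g : Ghost) (C : Block) (mem mem' : Mem) : Prop :=
  Mem.SameExcept [⟨g.RA - 1888, g.R⟩, C.span, ⟨g.R + 24, g.R + 28⟩] mem mem'

/-- Off the three windows nothing changed. -/
theorem Ex.eqOn {g : Ghost} {C : Block} {mem mem' : Mem} (h : Ex g C mem mem') (lo hi : Nat)
    (h1 : hi ≤ g.RA - 1888 ∨ g.R ≤ lo) (h2 : hi ≤ C.base ∨ C.base + C.size ≤ lo) (h3 : hi ≤ g.R + 24 ∨ g.R + 28 ≤ lo) :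
    Mem.EqOn lo hi mem mem' := by
  apply Mem.SameExcept.eqOn h
  intro w hw
  simp only [List.mem_cons, List.mem_nil_iff, or_false] at hw
  rcases hw with rfl | rfl | rfl
  · exact h1
  · simp only [vblock]
    exact h2
  · exact h3

/-- **`Frame` at the end of an iteration.** -/
theorem Ex.frame {u₀ : State} {g : Ghost} {pc pc' : Word} {A : Arena × List Obj} {v w : State} {C : Block}
    (hfr : Frame u₀ g pc A v) (hh : g.Hand A) (h : SDw g.len 1 A (g.Blk A) (g.Live A) v.mem g.f g.R) (hC : A.1.Blk C)
    (hb : Ex g C v.mem w.mem) (hrip : w.rip = pc') (hrsp : w.reg .rsp = addr g.R) (hcode : CodeOK u₀ w.mem)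
    (hinv : abiInv w) : Frame u₀ g pc' A w := by
  obtain ⟨k1, k2, k3, k4, k5, k6⟩ := where_all hfr hh h
  obtain ⟨c1, c2, c3, c4, c5, c6⟩ := blk_where7 hfr hh h hC
  refine frame_carry2 hfr hrip hrsp (hb.eqOn _ _ (by omega) (by omega) (by omega))
    (hb.eqOn _ _ (by omega) (by omega) (by omega)) hcode hinv (hb.eqOn _ _ (by omega) (by omega) (by omega)) ?_ ?_
  · intro i hi
    have e := hb.eqOn 0x120640 0x120650 (Or.inl (by omega)) (by omega) (by omega)
    rw [e.readLE _ 1 ?_ ?_ ?_]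
    · exact hfr.sh7 i hi
    · simp only [Vorbis.Globals.log2_4]
      rw [UInt64.toNat_ofNat']
      omega
    · simp only [Vorbis.Globals.log2_4]
      rw [UInt64.toNat_ofNat']
      omega
    · simp only [Vorbis.Globals.log2_4]
      rw [UInt64.toNat_ofNat']
      omega
  · refine hfr.same.step_same hb ?_
    intro w' hw' a ha1 ha2
    simp only [List.mem_cons, List.mem_nil_iff, or_false] at hw'
    rcases hw' with rfl | rfl | rfl
    · refine ⟨⟨g.RA - depth, g.RA⟩, List.mem_cons_self, ?_, ?_⟩
      · simp only [depth] at ha1 ⊢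
        exact ha1
      · simp only [] at ha2 ⊢
        omega
    · refine ⟨⟨g.A0.1.B, g.A0.1.B + g.A0.1.L⟩, ?_, ?_, ?_⟩
      · simp only [footprint, writes, List.mem_cons, true_or, or_true]
      · simp only [vblock] at ha1 ⊢
        omega
      · simp only [vblock] at ha2 ⊢
        omega
    · refine ⟨⟨g.RA - depth, g.RA⟩, List.mem_cons_self, ?_, ?_⟩
      · simp only [depth] at ha1 ⊢
        omega
      · simp only [] at ha2 ⊢
        omega

/-- **`SDw … 1` at the end of an iteration**: the frame constants `[R+8]`, `[R+10H]`, `[R+20H]` lie off the counter's slot. -/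
theorem Ex.sdw {u₀ : State} {g : Ghost} {pc : Word} {A : Arena × List Obj} {v : State} {mem' : Mem} {C : Block}
    (hfr : Frame u₀ g pc A v) (hh : g.Hand A) (h : SDw g.len 1 A (g.Blk A) (g.Live A) v.mem g.f g.R) (hC : A.1.Blk C)
    (hb : Ex g C v.mem mem') : SDw g.len 1 A (g.Blk A) (g.Live A) mem' g.f g.R := by
  obtain ⟨k1, k2, k3, k4, k5, k6⟩ := where_all hfr hh h
  obtain ⟨c1, c2, c3, c4, c5, c6⟩ := blk_where7 hfr hh h hC
  refine sdw_carry_c h ?_ (hb.eqOn _ _ (by omega) (by omega) (by omega)) ?_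
  · simp only [vblock, voff]
    exact hb.eqOn _ _ (by omega) (by omega) (by omega)
  · obtain ⟨f1, f2, f3, f4, f5⟩ := h.frame
    have e1 := hb.eqOn (g.R + 8) (g.R + 24) (by omega) (by omega) (by omega)
    have e2 := hb.eqOn (g.R + 28) (g.R + 40) (by omega) (by omega) (by omega)
    refine ⟨f1, ?_, ?_, ?_, ?_⟩
    · rw [e1.u64 _ (by omega) (by omega) (by omega)]
      exact f2
    · rw [e2.u32 _ (by omega) (by omega) (by omega)]
      exact f3
    · intro hk
      rw [e1.u8 _ (by omega) (by omega) (by omega)]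
      exact f4 hk
    · intro hk
      omega

/-- **CM1 – CM3 at the end of an iteration** (`C` a string block, not the table). -/
theorem Ex.comment {u₀ : State} {g : Ghost} {pc : Word} {A : Arena × List Obj} {v : State} {mem' : Mem} {C : Block} {n : Nat}
    (hfr : Frame u₀ g pc A v) (hh : g.Hand A) (h : SDw g.len 1 A (g.Blk A) (g.Live A) v.mem g.f g.R) (hC : A.1.Blk C)
    (hc : CommentOK A.1.Blk v.mem g.f n) (hne : C.base ≠ stb_vorbis.comment_list v.mem g.f) (hb : Ex g C v.mem mem') :
    CommentOK A.1.Blk mem' g.f n := by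
  obtain ⟨k1, k2, k3, k4, k5, k6⟩ := where_all hfr hh h
  obtain ⟨c1, c2, c3, c4, c5, c6⟩ := blk_where7 hfr hh h hC
  have hobj : (objBlock g.f).Same v.mem mem' := by
    simp only [vblock, voff]
    exact hb.eqOn _ _ (by omega) (by omega) (by omega)
  refine hc.frame (ObjSame.of_same hobj (by simp only [voff]; omega)) ?_
  intro B hB
  have hblk := hc.reads_blk hB
  obtain ⟨b1, _, _, _, _, _⟩ := blk_where7 hfr hh h hblk
  have hbase : B.base = stb_vorbis.comment_list v.mem g.f := by
    cases hB
    rfl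
  have hd : B.disjoint C := h.arena.blkOK.disjoint_of_base hblk hC (by rw [hbase]; exact fun e => hne e.symm)
  simp only [vblock] at hd
  exact ⟨hb.eqOn _ _ (by omega) (by omega) (by omega), h.arena.blkOK.no_wrap hblk⟩

/-! ### The error exits, in general -/

/-- A window that the error exits may have written: inside the dead stack, inside an arena block, or `f->eof` / `f->error`
(`[f+136, f+144)`). -/
def Harmless (g : Ghost) (A : Arena × List Obj) (s : Span) : Prop :=
  (g.RA - 1888 ≤ s.lo ∧ s.hi ≤ g.R) ∨ (∃ C, A.1.Blk C ∧ C.base ≤ s.lo ∧ s.hi ≤ C.base + C.size) ∨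
    (g.f + 136 ≤ s.lo ∧ s.hi ≤ g.f + 144)

/-- Off the dead stack, the arena's buffer and `[f+136, f+144)` nothing changed. -/
theorem harmless_eqOn {u₀ : State} {g : Ghost} {pc : Word} {A : Arena × List Obj} {v : State} {mem' : Mem} {spans : List Span}
    (hfr : Frame u₀ g pc A v) (hh : g.Hand A) (h : SDw g.len 1 A (g.Blk A) (g.Live A) v.mem g.f g.R)
    (hs : Mem.SameExcept spans v.mem mem') (hall : ∀ s, s ∈ spans → Harmless g A s) (lo hi : Nat)
    (h1 : hi ≤ g.RA - 1888 ∨ g.R ≤ lo) (h2 : hi ≤ g.A0.1.B ∨ g.A0.1.B + g.A0.1.L ≤ lo)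
    (h3 : hi ≤ g.f + 136 ∨ g.f + 144 ≤ lo) : Mem.EqOn lo hi v.mem mem' := by
  apply Mem.SameExcept.eqOn hs
  intro w hw
  rcases hall w hw with hd | ⟨C, hC, c1, c2⟩ | hf
  · omega
  · obtain ⟨_, _, _, _, b5, b6⟩ := blk_where7 hfr hh h hC
    omega
  · omega

/-- **`AtERR` after `error(f, e)` returned 0, in general**: since the cut point `v` the memory changed only in harmless windows. -/
theorem atERR_of_harmless {u₀ : State} {g : Ghost} {pc : Word} {A : Arena × List Obj} {n : Nat} {v r : State} {spans : List Span}
    (hfr : Frame u₀ g pc A v) (hh : g.Hand A) (hsd : SDw g.len 1 A (g.Blk A) (g.Live A) v.mem g.f g.R)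
    (hcom : CommentOK A.1.Blk v.mem g.f n) (hs : Mem.SameExcept spans v.mem r.mem) (hall : ∀ s, s ∈ spans → Harmless g A s)
    (hrip : r.rip = pc_ERR) (hrsp : r.reg .rsp = addr g.R) (hcode : CodeOK u₀ r.mem) (hinv : abiInv r)
    (hrax : (r.reg .rax).toNat % 2 ^ 32 = 0) : AtERR u₀ g r := by
  obtain ⟨k1, k2, k3, k4, k5, k6⟩ := where_all hfr hh hsd
  have hb := hsd.arena.bounds
  have h1x := hsd.arena.AR1x
  have eB := hfr.ext.B
  have eL := hfr.ext.L
  have hout := hh.objOut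
  simp only [voff] at hout
  have hlogout := hh.outside ⟨0x120640, 16⟩ (by
    simp only [fixedBlocks, globalBlocks, List.mem_cons, true_or, or_true])
  simp only [] at hlogout
  have heq := harmless_eqOn hfr hh hsd hs hall
  have hun : ShadowUntouched v.mem r.mem := heq _ _ (by omega) (by omega) (by omega)
  -- Frame
  have hfr' : Frame u₀ g pc_ERR A r := by
    refine frame_carry hfr hrip hrsp (heq _ _ (by omega) (by omega) (by omega)) hcode hinv hun ?_ ?_
    · intro i hi
      have e := heq 0x120640 0x120650 (by omega) (by omega) (by omega)
      rw [e.readLE _ 1 ?_ ?_ ?_]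
      · exact hfr.sh7 i hi
      · simp only [Vorbis.Globals.log2_4]
        rw [UInt64.toNat_ofNat']
        omega
      · simp only [Vorbis.Globals.log2_4]
        rw [UInt64.toNat_ofNat']
        omega
      · simp only [Vorbis.Globals.log2_4]
        rw [UInt64.toNat_ofNat']
        omega
    · refine hfr.same.step_same hs ?_
      intro w' hw' a ha1 ha2
      rcases hall w' hw' with hd | ⟨C, hC, c1, c2⟩ | hf
      · refine ⟨⟨g.RA - depth, g.RA⟩, List.mem_cons_self, ?_, ?_⟩
        · simp only [depth]
          omega
        · simp only []
          omega
      · obtain ⟨_, _, _, _, b5, b6⟩ := blk_where7 hfr hh hsd hC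
        refine ⟨⟨g.A0.1.B, g.A0.1.B + g.A0.1.L⟩, ?_, ?_, ?_⟩
        · simp only [footprint, writes, List.mem_cons, true_or, or_true]
        · simp only []
          omega
        · simp only []
          omega
      · refine ⟨(objBlock (g.e.reg .rdi).toNat).span, ?_, ?_, ?_⟩
        · simp only [footprint, writes, List.mem_cons, true_or, or_true]
        · show g.f ≤ a
          omega
        · show a < g.f + Off.sizeof.stb_vorbis
          simp only [voff]
          omega
  -- Bits: none of its four windows was written
  have hbits : Bits (g.Blk A) g.len r.mem g.f := by
    apply hsd.bits.frame_fields
    exact ⟨heq _ _ (by omega) (by omega) (by omega), heq _ _ (by omega) (by omega) (by omega),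
      heq _ _ (by omega) (by omega) (by omega), heq _ _ (by omega) (by omega) (by omega)⟩
  -- SDw
  have hf : g.f + Off.sizeof.stb_vorbis ≤ 2 ^ 64 := by
    simp only [voff]
    omega
  have hsd' : SDw g.len 1 A (g.Blk A) (g.Live A) r.mem g.f g.R := by
    refine ⟨hsd.env.eqOn hun, hsd.frame.frame (heq _ _ (by omega) (by omega) (by omega)) (by omega), ?_, hsd.setups, hbits,
      ?_, ?_, ?_, ?_, ?_⟩
    · apply hsd.arena.frame hf
      simp only [voff]
      exact heq _ _ (by omega) (by omega) (by omega)
    · have h1 := hsd.first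
      simp only [vacc, voff] at h1 ⊢
      rw [(heq (g.f + 1749) (g.f + 1750) (by omega) (by omega) (by omega)).u8 _ (by omega) (by omega) (by omega)]
      exact h1
    · have h1 := hsd.discard0
      simp only [vacc, voff] at h1 ⊢
      rw [(heq (g.f + 1784) (g.f + 1788) (by omega) (by omega) (by omega)).i32 _ (by omega) (by omega) (by omega)]
      exact h1
    · intro hk
      apply (hsd.header hk).transfer
      apply ObjEq.of_eqOn
      · intro w hw
        simp only [HeaderOK.wins, List.mem_cons, List.mem_nil_iff, or_false] at hw
        rcases hw with rfl | rfl <;> simp only [] <;> omega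
      · intro w hw
        simp only [HeaderOK.wins, List.mem_cons, List.mem_nil_iff, or_false] at hw
        rcases hw with rfl | rfl
        · exact heq _ _ (by omega) (by omega) (by simp only []; omega)
        · exact heq _ _ (by omega) (by omega) (by simp only []; omega)
    · intro hk
      omega
    · have h1 := hsd.rest
      have e : restFrom 1 = 160 := rfl
      unfold RestZero at h1 ⊢
      rw [e] at h1 ⊢
      apply h1.frame
      · simp only [voff]
        exact heq _ _ (by omega) (by omega) (by omega)
      · simp only [voff]
        omega
  -- H1 = CM2: the two fields and the block predicate
  have h1 : H1 (g.Blk A) r.mem g.f := by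
    have e_n : stb_vorbis.comment_list_length r.mem g.f = stb_vorbis.comment_list_length v.mem g.f := by
      simp only [vacc, voff]
      exact (heq (g.f + 32) (g.f + 36) (by omega) (by omega) (by omega)).i32 _ (by omega) (by omega) (by omega)
    have e_c : stb_vorbis.comment_list r.mem g.f = stb_vorbis.comment_list v.mem g.f := by
      simp only [vacc, voff]
      exact (heq (g.f + 40) (g.f + 48) (by omega) (by omega) (by omega)).ptr _ (by omega) (by omega) (by omega)
    have hc2 : CM2 A.1.Blk r.mem g.f := by
      unfold CM2
      rw [e_n, e_c]
      exact hcom.CM2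
    rcases hc2 with h0 | h2
    · exact Or.inl h0
    · exact Or.inr (up g A _ h2.2)
  exact ⟨A, hfr', hh, Or.inl ⟨hrax, SDw.failed hsd' (by omega) h1⟩⟩

/-! ### Over `setup_malloc` -/

/-- What `setup_malloc(f, n)` may change besides the dead stack, seen from a cut point: `setup_memory_required`, `setup_offset`, and
the shadow of the new block. -/
def MlSpans (g : Ghost) (A : Arena) (n : Nat) : List Span :=
  [⟨g.RA - 1888, g.R⟩, ⟨g.f + 8, g.f + 12⟩, ⟨g.f + 128, g.f + 132⟩, shadowSpan (A.B + A.S + 32) (A.B + A.S + 32 + n)]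

/-- Off the dead stack, the two fields and the shadow region nothing changed. -/
theorem ml_eqOn {g : Ghost} {A : Arena} {n : Nat} {mem mem' : Mem} (h : Mem.SameExcept (MlSpans g A n) mem mem') (lo hi : Nat)
    (h1 : hi ≤ g.RA - 1888 ∨ g.R ≤ lo) (h2 : hi ≤ g.f + 8 ∨ g.f + 132 ≤ lo ∨ (g.f + 12 ≤ lo ∧ hi ≤ g.f + 128))
    (h3 : hi ≤ 0xC00000) : Mem.EqOn lo hi mem mem' := by
  apply Mem.SameExcept.eqOn h
  intro w hw
  simp only [MlSpans, List.mem_cons, List.mem_nil_iff, or_false] at hw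
  rcases hw with rfl | rfl | rfl | rfl
  · exact h1
  · simp only []
    omega
  · simp only []
    omega
  · unfold shadowSpan
    simp only []
    omega

/-- **The memory-dependent clauses of `Core7` over ANY allocator-like change of memory**, for a ghost arena `A'` that extends `A`
with more live objects: `*f` reads the same but `[8,12)` and `[128,136)` (`ObjSame`), the frame constants and the arena blocks
are kept, and the callee's post provides the arena layer and the shadow layer of `A'`. -/
theorem sdw_grow {u₀ : State} {g : Ghost} {pc : Word} {A A' : Arena × List Obj} {v : State} {mem' : Mem}
    (hfr : Frame u₀ g pc A v) (hh : g.Hand A) (h : SDw g.len 1 A (g.Blk A) (g.Live A) v.mem g.f g.R)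
    (hext : A.1.Extends A'.1) (hsub : ∀ o, o ∈ A.2 → o ∈ A'.2) (hs : ObjSame g.f v.mem mem')
    (hrest : Mem.EqOn (g.f + 160) (g.f + 1480) v.mem mem') (hfrm : Mem.EqOn (g.R + 8) (g.R + 0x28) v.mem mem')
    (harena : ArenaOK A'.1 A'.2 mem' g.f) (hinv : ShadowInv A'.2 g.frames' g.R mem') :
    SDw g.len 1 A' (g.Blk A') (g.Live A') mem' g.f g.R := by
  obtain ⟨k1, k2, k3, k4, k5, k6⟩ := where_all hfr hh h
  have hh' : g.Hand A' := HandOK.mono hh hext hsub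
  have hokx : BlkOK (listBlk g.extra) :=
    ⟨fun B hB => h.env.ok.inside B (Or.inr hB), fun B C hB hC => h.env.ok.apart B C (Or.inr hB) (Or.inr hC)⟩
  have hok : BlkOK (g.Blk A') := by
    apply harena.runBlk_ok hokx
    intro C hC
    rcases List.mem_cons.mp hC with rfl | hm
    · exact hh'.objOut
    · exact hh'.outside C hm
  have hlive : BlkLive (g.Blk A') (g.Live A') := by
    apply harena.runBlk_live (fun o ho => List.mem_append_right _ ho)
    intro B hB
    have hl : B.live (g.Live A) := h.env.live B (Or.inr hB)
    refine InLive.mono hl ?_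
    intro x hx
    obtain ⟨o, ho, hb⟩ := hx
    refine ⟨o, ?_, hb⟩
    rcases List.mem_append.mp ho with h1 | h2
    · exact List.mem_append_left _ h1
    · exact List.mem_append_right _ (hsub o h2)
  refine ⟨⟨hinv.covers, hok, hlive⟩, h.frame.frame hfrm (by omega), harena, up g A', ?_, ?_, ?_, ?_, ?_, ?_⟩
  · exact (h.bits.frame hs).reblk (runBlk_extra List.mem_cons_self)
      (runBlk_extra (List.mem_cons_of_mem _ (fixed_in g.len)))
  · have h1 := h.first
    simp only [vacc, voff] at h1 ⊢
    rw [hs.u8 1749 (by decide)]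
    exact h1
  · have h1 := h.discard0
    simp only [vacc, voff] at h1 ⊢
    rw [hs.i32 1784 (by decide)]
    exact h1
  · intro hk
    exact (h.header hk).frame hs
  · intro hk
    omega
  · have h1 := h.rest
    have e : restFrom 1 = 160 := rfl
    unfold RestZero at h1 ⊢
    rw [e] at h1 ⊢
    apply h1.frame
    · simp only [voff]
      exact hrest
    · simp only [voff]
      omega

/-! ### The five sub-segments -/

/-- **7.a** 0x11409e … the return of `get32_packet` (0x1140b8): the check of `f->comment_list_length`, the test `n ≤ i` (exit
`At8`), the call. -/
def SegA (Lay : Layout) (μ : Microarch) (u₀ : State) : Prop :=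
  ∀ (g : Ghost) (A : Arena × List Obj) (i : Nat) (v : State), Body7 u₀ g A i v →
    ReachVia Lay μ WayInv v (fun w => At8 u₀ g w ∨
      ∃ A', In7a u₀ g A' i (stb_vorbis.comment_list_length v.mem g.f) w)

/-- **7.b** 0x1140b8 … the return of `setup_malloc` (0x1140ec): FIX 1 (`ja` → the stub 0x11400e → `AtERR`), the check of
`f->comment_list`, r12 / r15, the call. -/
def SegB (Lay : Layout) (μ : Microarch) (u₀ : State) : Prop :=
  ∀ (g : Ghost) (A : Arena × List Obj) (i : Nat) (n : Int) (v : State), In7a u₀ g A i n v →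
    ReachVia Lay μ WayInv v (fun w => AtERR u₀ g w ∨ ∃ A' len p, In7b u₀ g A' i n len p w)

/-- **7.c** 0x1140ec … the head of the byte loop (0x11406d) with `j = 0`: the checked store of the pointer, the re-load and the
NULL test (`je` → the stub 0x114020 → `AtERR`). -/
def SegC (Lay : Layout) (μ : Microarch) (u₀ : State) : Prop :=
  ∀ (g : Ghost) (A : Arena × List Obj) (i : Nat) (n : Int) (len p : Nat) (v : State), In7b u₀ g A i n len p v →
    ReachVia Lay μ WayInv v (fun w => AtERR u₀ g w ∨ ∃ A', In7c u₀ g A' i n len 0 w)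

/-- **7.d** the head of the byte loop: `j < len` → the return of `get8_packet` (0x11403a); `len ≤ j` → the terminator store,
`++i`, the head of loop 3695 with the counter `i + 1` (and the count unchanged). -/
def SegD (Lay : Layout) (μ : Microarch) (u₀ : State) : Prop :=
  ∀ (g : Ghost) (A : Arena × List Obj) (i : Nat) (n : Int) (len j : Nat) (v : State), In7c u₀ g A i n len j v →
    ReachVia Lay μ WayInv v (fun w =>
      (∃ A', Body7 u₀ g A' (i + 1) w ∧ stb_vorbis.comment_list_length w.mem g.f = n) ∨
      (∃ A', In7d u₀ g A' i n len j w))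

/-- **7.e** 0x11403a … the head of the byte loop with `j + 1`: the three checks and the byte store `comment_list[i][j] = al`. -/
def SegE (Lay : Layout) (μ : Microarch) (u₀ : State) : Prop :=
  ∀ (g : Ghost) (A : Arena × List Obj) (i : Nat) (n : Int) (len j : Nat) (v : State), In7d u₀ g A i n len j v →
    ReachVia Lay μ WayInv v (fun w => ∃ A', In7c u₀ g A' i n len (j + 1) w)

/-- **`In7a` from the head of the iteration and get32_packet's return**: the memory changed only where a packet reader writes,
no shadow byte, `Bits f` from the callee's post. -/
theorem In7a.of_reader {u₀ : State} {g : Ghost} {A : Arena × List Obj} {i : Nat} {v r : State} (hb : Body7 u₀ g A i v)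
    (hrd : Rd g v.mem r.mem) (hun : ShadowUntouched v.mem r.mem) (hrip : r.rip = L.start_decoder.cut61)
    (hrsp : r.reg .rsp = addr g.R) (hrbp : r.reg .rbp = addr g.f) (hcode : CodeOK u₀ r.mem) (hinv : abiInv r)
    (hbits : Bits (g.Blk A) g.len r.mem g.f) (hrax : (r.reg .rax).toNat < 2 ^ 32)
    (hlt : (i : Int) < stb_vorbis.comment_list_length v.mem g.f) :
    In7a u₀ g A i (stb_vorbis.comment_list_length v.mem g.f) r := by
  obtain ⟨hfr, hhand, _, hsd, hnoT, hslot, hile, hcom⟩ := hb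
  obtain ⟨k1, k2, k3, k4, k5, k6⟩ := where_all hfr hhand hsd
  refine ⟨⟨hrd.frame hfr hhand hsd hun hrip hrsp hcode hinv, hhand, hrbp, hrd.sdw hfr hhand hsd hun hbits, hnoT, ?_, ?_, hlt⟩,
    hrd.comment hfr hhand hsd hcom, hrax⟩
  · rw [(hrd.eqOn (g.R + 24) (g.R + 28) (by omega) (by omega)).u32 _ (by omega) (by omega) (by omega)]
    exact hslot
  · simp only [vacc, voff]
    exact (hrd.eqOn (g.f + 32) (g.f + 36) (by omega) (by omega)).i32 _ (by omega) (by omega) (by omega)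

/-- **`In7d` from the head of the byte loop and get8_packet's return** (`j < len`): the reader wrote its windows of `*f` and the dead
stack only; the table of comment pointers and the string block are arena blocks. -/
theorem In7d.of_reader {u₀ : State} {g : Ghost} {A : Arena × List Obj} {i : Nat} {n : Int} {len j : Nat} {v r : State}
    (h : In7c u₀ g A i n len j v) (hjlt : j < len) (hrd : Rd g v.mem r.mem) (hun : ShadowUntouched v.mem r.mem)
    (hrip : r.rip = L.start_decoder.cut58) (hrsp : r.reg .rsp = addr g.R) (hrbp : r.reg .rbp = addr g.f)
    (hcode : CodeOK u₀ r.mem) (hinv : abiInv r) (hbits : Bits (g.Blk A) g.len r.mem g.f)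
    (hrbx : r.reg .rbx = v.reg .rbx) (hr12 : r.reg .r12 = v.reg .r12) (hr13 : r.reg .r13 = v.reg .r13) :
    In7d u₀ g A i n len j r := by
  obtain ⟨⟨hfr, hhand, _, hsd, hnoT, hslot, hcount, hlt⟩, hcom, hbx, hlenle, h12, h13, _, hstr, hne⟩ := h
  obtain ⟨k1, k2, k3, k4, k5, k6⟩ := where_all hfr hhand hsd
  have hn0 : (i : Int) < stb_vorbis.comment_list_length v.mem g.f := by
    rw [hcount]
    exact hlt
  have htab : A.1.Blk ⟨stb_vorbis.comment_list v.mem g.f, 8 * (stb_vorbis.comment_list_length v.mem g.f).toNat⟩ := by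
    rcases hcom.CM2 with h0 | h1
    · omega
    · exact h1.2
  obtain ⟨t1, t2, t3, t4, t5, t6⟩ := blk_where7 hfr hhand hsd htab
  simp only [] at t1 t2 t3
  have hnn : 0 ≤ stb_vorbis.comment_list_length v.mem g.f := by omega
  have e_n : stb_vorbis.comment_list_length r.mem g.f = stb_vorbis.comment_list_length v.mem g.f := by
    simp only [vacc, voff]
    exact (hrd.eqOn (g.f + 32) (g.f + 36) (by omega) (by omega)).i32 _ (by omega) (by omega) (by omega)
  have e_c : stb_vorbis.comment_list r.mem g.f = stb_vorbis.comment_list v.mem g.f := by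
    simp only [vacc, voff]
    exact (hrd.eqOn (g.f + 40) (g.f + 48) (by omega) (by omega)).ptr _ (by omega) (by omega) (by omega)
  have hat : ∀ m : Mem, stb_vorbis.comment_list_at m g.f i = stb_vorbis.comment_list m g.f + 8 * i := fun _ => rfl
  have e_at : stb_vorbis.comment_list_at r.mem g.f i = stb_vorbis.comment_list_at v.mem g.f i := by
    rw [hat, hat, e_c]
  have e_p : r.mem.ptr (stb_vorbis.comment_list_at v.mem g.f i) = v.mem.ptr (stb_vorbis.comment_list_at v.mem g.f i) := by
    rw [hat]
    exact (hrd.eqOn (stb_vorbis.comment_list v.mem g.f + 8 * i) (stb_vorbis.comment_list v.mem g.f + 8 * i + 8) (by omega)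
      (by omega)).ptr _ (Nat.le_refl _) (Nat.le_refl _) (by omega)
  refine ⟨⟨hrd.frame hfr hhand hsd hun hrip hrsp hcode hinv, hhand, hrbp, hrd.sdw hfr hhand hsd hun hbits, hnoT, ?_, ?_, hlt⟩,
    hrd.comment hfr hhand hsd hcom, ?_, hlenle, ?_, ?_, hjlt, ?_, ?_⟩
  · rw [(hrd.eqOn (g.R + 24) (g.R + 28) (by omega) (by omega)).u32 _ (by omega) (by omega) (by omega)]
    exact hslot
  · rw [e_n]
    exact hcount
  · rw [hrbx]
    exact hbx
  · rw [hr12]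
    exact h12
  · rw [hr13]
    exact h13
  · rw [e_at, e_p]
    exact hstr
  · rw [e_at, e_p, e_c]
    exact hne

/-- **`In7b` from `In7a` and setup_malloc's return** (`s` = the callee's entry state, `r` = its return), GIVEN `hfail`
(a refused allocation leaves the memory from E00000H on alone: from the last conjunct of the contract's failure clause). Success: the ghost arena grows
by the block of `len + 1` bytes, which is not the table of comment pointers (allocated later); failure: `p = 0`, the same arena. -/
theorem In7b.of_malloc {u₀ : State} {g : Ghost} {A : Arena × List Obj} {i : Nat} {n : Int} {len : Nat} {v s r : State}
    (h : In7a u₀ g A i n v) (hlen : len ≤ 0x7ffffffe)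
    (hs_top : (s.reg .rsp).toNat + 8 = g.R) (hs_rdi : (s.reg .rdi).toNat = g.f)
    (hs_rsi : (s.reg .rsi).toNat % 2 ^ 32 = len + 1)
    (hm : Mem.SameExcept (MlSpans g A.1 (len + 1)) v.mem r.mem)
    (hpost : (setup_malloc.spec A.2 g.frames' A.1).post s r)
    (hun_vs : ShadowUntouched v.mem s.mem)
    (hfail : ¬ A.1.Fits (len + 1) → Mem.EqOn 0xE00000 (2 ^ 64) v.mem r.mem)
    (hrip : r.rip = L.start_decoder.cut62) (hrsp : r.reg .rsp = addr g.R) (hrbp : r.reg .rbp = addr g.f)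
    (hcode : CodeOK u₀ r.mem) (habi : abiInv r)
    (hrbx : r.reg .rbx = addr len) (hr12 : r.reg .r12 = addr (8 * i)) (hr14 : r.reg .r14 = addr (g.f + 40))
    (hr15 : r.reg .r15 = addr (stb_vorbis.comment_list_at v.mem g.f i)) :
    ∃ A' p, In7b u₀ g A' i n len p r := by
  obtain ⟨⟨hfr, hhand, _, hsd, hnoT, hslot, hcount, hlt⟩, hcom, _⟩ := h
  obtain ⟨k1, k2, k3, k4, k5, k6⟩ := where_all hfr hhand hsd
  have hb := hsd.arena.bounds
  have h1x := hsd.arena.AR1x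
  have eB := hfr.ext.B
  have eL := hfr.ext.L
  have hout := hhand.objOut
  simp only [voff] at hout
  have hf : g.f + Off.sizeof.stb_vorbis ≤ 2 ^ 64 := by
    simp only [voff]
    omega
  -- what is the same in both cases: `*f` but the two allocator fields, the live frame, `log2_4`
  have hs : ObjSame g.f v.mem r.mem := by
    apply ObjSame.of_sameExcept hm hf
    intro w hw
    simp only [MlSpans, List.mem_cons, List.mem_nil_iff, or_false] at hw
    rcases hw with rfl | rfl | rfl | rfl
    · simp only []
      omega
    · simp only []
      omega
    · simp only []
      omega
    · unfold shadowSpan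
      simp only []
      omega
  have hrest := ml_eqOn hm (g.f + 160) (g.f + 1480) (by omega) (by omega) (by omega)
  have hfrm := ml_eqOn hm (g.R + 8) (g.R + 0x28) (by omega) (by omega) (by omega)
  have hup := ml_eqOn hm g.R (g.RA + 8) (by omega) (by omega) (by omega)
  have hlog : Log2_4In r.mem := by
    intro j hj
    have e := ml_eqOn hm 0x120640 0x120650 (by omega) (by omega) (by omega)
    rw [e.readLE _ 1 ?_ ?_ ?_]
    · exact hfr.sh7 j hj
    · simp only [Vorbis.Globals.log2_4]
      rw [UInt64.toNat_ofNat']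
      omega
    · simp only [Vorbis.Globals.log2_4]
      rw [UInt64.toNat_ofNat']
      omega
    · simp only [Vorbis.Globals.log2_4]
      rw [UInt64.toNat_ofNat']
      omega
  -- the table of comment pointers is kept; the two fields of CM2 read the same
  have hn0 : (i : Int) < stb_vorbis.comment_list_length v.mem g.f := by
    rw [hcount]
    exact hlt
  have htab : A.1.Blk ⟨stb_vorbis.comment_list v.mem g.f, 8 * (stb_vorbis.comment_list_length v.mem g.f).toNat⟩ := by
    rcases hcom.CM2 with h0 | h1
    · omega
    · exact h1.2
  have hkept : ∀ B, CommentOK.Reads v.mem g.f B → B.Kept v.mem r.mem := by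
    intro B hB
    have hblk := hcom.reads_blk hB
    obtain ⟨b1, b2, b3, _, _, _⟩ := blk_where7 hfr hhand hsd hblk
    exact ⟨ml_eqOn hm _ _ (by omega) (by omega) (by omega), hsd.arena.blkOK.no_wrap hblk⟩
  have hcomr : CommentOK A.1.Blk r.mem g.f i := hcom.frame hs hkept
  have e_c : stb_vorbis.comment_list r.mem g.f = stb_vorbis.comment_list v.mem g.f := by
    simp only [vacc, voff]
    exact hs.ptr 40 (by decide)
  have e_n : stb_vorbis.comment_list_length r.mem g.f = stb_vorbis.comment_list_length v.mem g.f := by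
    simp only [vacc, voff]
    exact hs.i32 32 (by decide)
  have e_at : stb_vorbis.comment_list_at r.mem g.f i = stb_vorbis.comment_list_at v.mem g.f i := by
    show stb_vorbis.comment_list r.mem g.f + 8 * i = stb_vorbis.comment_list v.mem g.f + 8 * i
    rw [e_c]
  have hslot' : r.mem.u32 (g.R + 0x18) = i := by
    rw [hfrm.u32 _ (by omega) (by omega) (by omega)]
    exact hslot
  have hpost : (A.1.Fits ((s.reg .rsi).toNat % 2 ^ 32) →
      (r.reg .rax).toNat = A.1.B + A.1.S + 32 ∧
      ArenaOK (A.1.pushSetup ((s.reg .rsi).toNat % 2 ^ 32)) (A.1.newSetupObj ((s.reg .rsi).toNat % 2 ^ 32) :: A.2) r.mem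
        (s.reg .rdi).toNat ∧
      ShadowInv (A.1.newSetupObj ((s.reg .rsi).toNat % 2 ^ 32) :: A.2) g.frames' ((s.reg .rsp).toNat + 8) r.mem) ∧
    (¬ A.1.Fits ((s.reg .rsi).toNat % 2 ^ 32) →
      r.reg .rax = 0 ∧ ArenaOK A.1 A.2 r.mem (s.reg .rdi).toNat ∧ ShadowUntouched s.mem r.mem ∧
      Mem.SameExcept
        [⟨(s.reg .rsp).toNat - 80, (s.reg .rsp).toNat⟩, ⟨(s.reg .rdi).toNat + 8, (s.reg .rdi).toNat + 12⟩] s.mem r.mem) := hpost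
  rw [hs_rsi, hs_rdi, hs_top] at hpost
  by_cases hfit : A.1.Fits (len + 1)
  · -- success
    obtain ⟨hrax, harena, hinv⟩ := hpost.1 hfit
    let A' : Arena × List Obj := (A.1.pushSetup (len + 1), A.1.newSetupObj (len + 1) :: A.2)
    have hext : A.1.Extends A'.1 := A.1.extends_pushSetup (len + 1)
    have hsub : ∀ o, o ∈ A.2 → o ∈ A'.2 := fun o ho => List.mem_cons_of_mem _ ho
    have hsd' : SDw g.len 1 A' (g.Blk A') (g.Live A') r.mem g.f g.R :=
      sdw_grow hfr hhand hsd hext hsub hs hrest hfrm harena hinv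
    have hsince := hsd.arena.since_pushSetup (len + 1)
    have hnewblk : A'.1.Blk ⟨A.1.B + A.1.S + 32, len + 1⟩ := by
      have := hsince.1
      rw [← Nat.add_assoc] at this
      exact this
    have hfits : A.1.S + 32 + r8 (len + 1) ≤ A.1.T := hfit
    have hle8 := le_r8 (len + 1)
    have hfr' : Frame u₀ g L.start_decoder.cut62 A' r := by
      refine ⟨hfr.entry, hrip, hrsp, ?_, ?_, ?_, ?_, ?_, ?_, ?_, ?_, hcode, habi, hinv, ?_, hfr.ext.trans hext, hfr.callers,
        hlog, ?_⟩
      · rw [hup.u64 _ (by omega) (by omega) (by omega)]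
        exact hfr.shadowIdx
      · rw [hup.u64 _ (by omega) (by omega) (by omega)]
        exact hfr.saved_rbx
      · rw [hup.u64 _ (by omega) (by omega) (by omega)]
        exact hfr.saved_rbp
      · rw [hup.u64 _ (by omega) (by omega) (by omega)]
        exact hfr.saved_r12
      · rw [hup.u64 _ (by omega) (by omega) (by omega)]
        exact hfr.saved_r13
      · rw [hup.u64 _ (by omega) (by omega) (by omega)]
        exact hfr.saved_r14
      · rw [hup.u64 _ (by omega) (by omega) (by omega)]
        exact hfr.saved_r15
      · rw [hup.u64 _ (by omega) (by omega) (by omega)]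
        exact hfr.saved_ra
      · intro o ho
        rcases List.mem_cons.mp ho with rfl | ho'
        · have h1 := hhand.arenaText
          show L.textHi ≤ A.1.B + (A.1.S + 32)
          omega
        · exact hfr.offText o ho'
      · refine hfr.same.step_same hm ?_
        intro w' hw' a ha1 ha2
        simp only [MlSpans, List.mem_cons, List.mem_nil_iff, or_false] at hw'
        rcases hw' with rfl | rfl | rfl | rfl
        · refine ⟨⟨g.RA - depth, g.RA⟩, List.mem_cons_self, ?_, ?_⟩
          · simp only [depth]
            exact ha1
          · simp only [] at ha2 ⊢
            omega
        · refine ⟨(objBlock (g.e.reg .rdi).toNat).span, ?_, ?_, ?_⟩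
          · simp only [footprint, writes, List.mem_cons, true_or, or_true]
          · show g.f ≤ a
            simp only [] at ha1
            omega
          · show a < g.f + Off.sizeof.stb_vorbis
            simp only [voff]
            simp only [] at ha2
            omega
        · refine ⟨(objBlock (g.e.reg .rdi).toNat).span, ?_, ?_, ?_⟩
          · simp only [footprint, writes, List.mem_cons, true_or, or_true]
          · show g.f ≤ a
            simp only [] at ha1
            omega
          · show a < g.f + Off.sizeof.stb_vorbis
            simp only [voff]
            simp only [] at ha2
            omega
        · refine ⟨shadowSpan g.A0.1.B (g.A0.1.B + g.A0.1.L), ?_, ?_, ?_⟩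
          · simp only [footprint, writes, List.mem_cons, true_or, or_true]
          · unfold shadowSpan at ha1 ⊢
            simp only [] at ha1 ⊢
            omega
          · unfold shadowSpan at ha2 ⊢
            simp only [] at ha2 ⊢
            omega
    have hcom' : CommentOK A'.1.Blk r.mem g.f i := hcomr.reblk (fun B _ hB => hB.mono hext)
    -- the new block is not the table
    have hpne : A.1.B + A.1.S + 32 ≠ stb_vorbis.comment_list r.mem g.f := by
      rw [e_c]
      intro e
      have htab' : A'.1.Blk ⟨stb_vorbis.comment_list v.mem g.f, 8 * (stb_vorbis.comment_list_length v.mem g.f).toNat⟩ :=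
        htab.mono hext
      rcases harena.blkOK.apart _ _ hnewblk htab' with heq | hdis
      · have hold : A.1.Blk ⟨A.1.B + (A.1.S + 32), len + 1⟩ := by
          rw [← Nat.add_assoc, heq]
          exact htab
        exact hsince.2 hold
      · simp only [vblock] at hdis
        omega
    refine ⟨A', A.1.B + A.1.S + 32, ⟨hfr', HandOK.mono hhand hext hsub, hrbp, hsd', hnoT, hslot', ?_, hlt⟩, hcom', hrbx, hlen, hr12,
      hr14, ?_, ?_, Or.inr ⟨hnewblk, hpne⟩⟩
    · rw [e_n]
      exact hcount
    · rw [e_at]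
      exact hr15
    · exact eq_addr _ _ hrax
  · -- failure: NULL, the same arena
    obtain ⟨hrax, harena, hunsr, _⟩ := hpost.2 hfit
    have hhigh := hfail hfit
    have hun : ShadowUntouched v.mem r.mem := Mem.EqOn.trans hun_vs hunsr
    -- nothing but the dead stack and `setup_memory_required` changed
    have hm' : Mem.SameExcept [⟨g.RA - 1888, g.R⟩, ⟨g.f + 8, g.f + 12⟩, ⟨g.f + 128, g.f + 132⟩] v.mem r.mem := by
      intro a ha
      by_cases h1 : a.toNat < 0xC00000
      · apply hm
        intro w hw
        simp only [MlSpans, List.mem_cons, List.mem_nil_iff, or_false] at hw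
        rcases hw with rfl | rfl | rfl | rfl
        · exact ha _ List.mem_cons_self
        · exact ha _ (List.mem_cons_of_mem _ List.mem_cons_self)
        · exact ha _ (List.mem_cons_of_mem _ (List.mem_cons_of_mem _ List.mem_cons_self))
        · left
          unfold shadowSpan
          simp only []
          omega
      · by_cases h2 : a.toNat < 0xE00000
        · exact hun a (by omega) h2
        · exact hhigh a (by omega) a.toNat_lt
    have hsd' : SDw g.len 1 A (g.Blk A) (g.Live A) r.mem g.f g.R :=
      sdw_grow hfr hhand hsd (Arena.Extends.refl _) (fun _ ho => ho) hs hrest hfrm harena (hfr.shadow.untouched hun)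
    have hfr' : Frame u₀ g L.start_decoder.cut62 A r := by
      refine frame_carry hfr hrip hrsp hup hcode habi hun hlog ?_
      refine hfr.same.step_same hm' ?_
      intro w' hw' a ha1 ha2
      simp only [List.mem_cons, List.mem_nil_iff, or_false] at hw'
      rcases hw' with rfl | rfl | rfl
      · refine ⟨⟨g.RA - depth, g.RA⟩, List.mem_cons_self, ?_, ?_⟩
        · simp only [depth]
          exact ha1
        · simp only [] at ha2 ⊢
          omega
      · refine ⟨(objBlock (g.e.reg .rdi).toNat).span, ?_, ?_, ?_⟩
        · simp only [footprint, writes, List.mem_cons, true_or, or_true]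
        · show g.f ≤ a
          simp only [] at ha1
          omega
        · show a < g.f + Off.sizeof.stb_vorbis
          simp only [voff]
          simp only [] at ha2
          omega
      · refine ⟨(objBlock (g.e.reg .rdi).toNat).span, ?_, ?_, ?_⟩
        · simp only [footprint, writes, List.mem_cons, true_or, or_true]
        · show g.f ≤ a
          simp only [] at ha1
          omega
        · show a < g.f + Off.sizeof.stb_vorbis
          simp only [voff]
          simp only [] at ha2
          omega
    refine ⟨A, 0, ⟨hfr', hhand, hrbp, hsd', hnoT, hslot', ?_, hlt⟩, hcomr, hrbx, hlen, hr12, hr14, ?_, ?_, Or.inl rfl⟩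
    · rw [e_n]
      exact hcount
    · rw [e_at]
      exact hr15
    · rw [hrax]
      rfl

/-- The byte loop's counter as a number: r13 = `addr j` with `j ≤ len ≤ 7FFFFFFEH`. -/
theorem In7c.r13_toNat {u₀ : State} {g : Ghost} {A : Arena × List Obj} {i : Nat} {n : Int} {len j : Nat} {v : State}
    (h : In7c u₀ g A i n len j v) : (v.reg .r13).toNat = j := by
  rw [h.r13]
  apply toNat_addr
  have h1 := h.j_le
  have h2 := h.len_le
  omega

/-- **THE BYTE LOOP 3700** from 7.d and 7.e: from its head the machine reaches the head of loop 3695 with the counter `i + 1`.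
Measure `len − j`. -/
theorem byteLoop {Lay : Layout} {μ : Microarch} {u₀ : State} (hd : SegD Lay μ u₀) (he : SegE Lay μ u₀)
    (g : Ghost) (i : Nat) (n : Int) (len : Nat) (v : State)
    (hv : ∃ A j, In7c u₀ g A i n len j v) :
    ReachVia Lay μ WayInv v (fun w =>
      ∃ A', Body7 u₀ g A' (i + 1) w ∧ stb_vorbis.comment_list_length w.mem g.f = n) := by
  refine ReachVia.loop (Inv := fun w => ∃ A j, In7c u₀ g A i n len j w) (fun w => len - (w.reg .r13).toNat) ?_ v hv
  intro w hw
  obtain ⟨A, j, hc⟩ := hw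
  refine (hd g A i n len j w hc).trans ?_
  intro w1 h1
  rcases h1 with hexit | ⟨A1, hin⟩
  · exact ReachVia.done (Or.inl hexit)
  · refine (he g A1 i n len j w1 hin).trans ?_
    intro w2 h2
    obtain ⟨A2, hc2⟩ := h2
    refine ReachVia.done (Or.inr ⟨⟨A2, j + 1, hc2⟩, ?_⟩)
    have e1 := hc.r13_toNat
    have e2 := hc2.r13_toNat
    have hlt := hin.j_lt
    show len - (w2.reg .r13).toNat < len - (w.reg .r13).toNat
    rw [e1, e2]
    omega

/-- **THE COMPOSITION**: the five sub-segments give the statement of the unit. Loop 3695: invariant `At7`, measure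
`max(0, n − i)`; an iteration is 7.a, 7.b, 7.c, then the byte loop. -/
theorem compose7 {Lay : Layout} {μ : Microarch} {u₀ : State} (ha : SegA Lay μ u₀) (hb : SegB Lay μ u₀) (hc : SegC Lay μ u₀)
    (hd : SegD Lay μ u₀) (he : SegE Lay μ u₀) : Seg7 Lay μ u₀ := by
  intro g v0 hat0
  refine ReachVia.loop (Inv := fun v => At7 u₀ g v) (outerMeasure g) ?_ v0 hat0
  intro v hat
  obtain ⟨A, i, hbody⟩ := hat
  refine (ha g A i v hbody).trans ?_
  intro w1 h1
  rcases h1 with h8 | ⟨A1, h7a⟩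
  · exact ReachVia.done (Or.inl (Or.inl h8))
  · refine (hb g A1 i _ w1 h7a).trans ?_
    intro w2 h2
    rcases h2 with herr | ⟨A2, len, p, h7b⟩
    · exact ReachVia.done (Or.inl (Or.inr herr))
    · refine (hc g A2 i _ len p w2 h7b).trans ?_
      intro w3 h3
      rcases h3 with herr | ⟨A3, h7c⟩
      · exact ReachVia.done (Or.inl (Or.inr herr))
      · refine (byteLoop hd he g i _ len w3 ⟨A3, 0, h7c⟩).trans ?_
        intro w4 h4
        obtain ⟨A4, hb4, hcount⟩ := h4
        refine ReachVia.done (Or.inr ⟨⟨A4, i + 1, hb4⟩, ?_⟩)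
        have hlt := h7a.core.lt
        have hs0 := hbody.slot_i
        have hs4 := hb4.slot_i
        unfold outerMeasure
        rw [hcount, hs0, hs4]
        omega

/-! ### Sub-segment 7.a, walked (complete) -/

/-- **7.a** (0x11409e … 0x1140b8): the check of `f->comment_list_length` (0x1140a2), the exit `n ≤ i` to `At8` (0x114127), the call of
`get32_packet` (0x1140b3) and `In7a` after it. -/
theorem segA {Lay : Layout} (hLay : Lay.hi = 0x1000000) {μ : Microarch} (hμ : UserX.MicroOK μ) {u₀ : State}
    (hcode : HasCodeNat Lay u₀ Vorbis.L.start_decoder.entry Vorbis.Code.code_start_decoder.nat Vorbis.L.start_decoder.size)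
    (h_load4 : Asan.SmallCheck Lay μ Vorbis.WayInv (Vorbis.CodeOK u₀) [.rax, .rcx, .rdx] 4 Vorbis.L.__asan_load4_noabort.entry)
    (h_get32 : ∀ (others : List Obj) (frames : List (Nat × FrameLayout)) (Blk : Block → Prop) (len : Nat), Calls Lay μ Vorbis.WayInv (Vorbis.conv u₀) Vorbis.L.get32_packet.entry (Vorbis.Spec.get32_packet.spec others frames Blk len)) :
    SegA Lay μ u₀ := by
  intro g A i v hb
  have hb0 := hb
  obtain ⟨hfr, hhand, hrbp, hsd, hnoT, hslot, hile, hcom⟩ := hb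
  have he := hfr.entry
  v_entry he
  simp only [depth] at he_room he_stack
  have hg32 := h_get32 A.2 g.frames' (g.Blk A) g.len
  have hRA : g.R + 1480 = (g.e.reg .rsp).toNat := hfr.r_eq.1
  have hR8 : g.R % 8 = 0 := hfr.r_eq.2
  have hgf : g.f = (g.e.reg .rdi).toNat := rfl
  have hgRA : g.RA = (g.e.reg .rsp).toNat := rfl
  have hab := obj_above hfr hhand
  have hobr := hsd.bits.OBR
  simp only [voff] at hobr
  have w_rip := hfr.rip
  have c_rsp : v.reg .rsp = g.e.reg .rsp - 1480 := by
    rw [hfr.rsp]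
    have e0 := slot_addr hfr 0 1480 rfl
    rw [Nat.add_zero] at e0
    exact e0
  have c_rbp : v.reg .rbp = g.e.reg .rdi := by
    rw [hrbp]
    exact addr_toNat _
  clear hrbp
  have w_eq : Mem.EqOn Vorbis.L.textLo Vorbis.L.textHi u₀.mem v.mem := hfr.code
  have hdf : v.flags .df = false := (show abiInv _ from hfr.inv).1
  have hmx : v.mxcsr &&& 0x1F80 = 0x1F80 := (show abiInv _ from hfr.inv).2
  have hsse := Vorbis.sseOK_of_abiInv hfr.inv
  have l_i : v.mem.readLE (g.e.reg .rsp - 1456) 4 = i := by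
    have ea : addr (g.R + 24) = g.e.reg .rsp - 1456 := slot_addr hfr 24 1456 rfl
    rw [← ea]
    exact hslot
  have hcnt : stb_vorbis.comment_list_length v.mem g.f = sint32 (v.mem.readLE (g.e.reg .rdi + 32) 4) := by
    simp only [vacc, voff]
    unfold Mem.i32 Mem.u32
    have ea : addr g.f = g.e.reg .rdi := addr_toNat _
    rw [← addr_add_lit, ea]
  have hlt32 : v.mem.readLE (g.e.reg .rdi + 32) 4 < 2 ^ 32 := Mem.readLE_lt' _ _ 4
  obtain ⟨n32, hn32⟩ : ∃ n32 : Nat, v.mem.readLE (g.e.reg .rdi + 32) 4 = n32 := ⟨_, rfl⟩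
  rw [hn32] at hlt32 hcnt
  u_walk hcode [hμ.vendor] until [Vorbis.L.start_decoder.cut61, Vorbis.L.start_decoder.cut63] span [Vorbis.L.textLo, Vorbis.L.textHi] side (v_side)
  · -- the check of `f->comment_list_length`
    have hun : ShadowUntouched v.mem s_1140a2.mem := by v_untouched
    exact check_site hfr.shadow hun (hsd.bits.site_field hsd.env.live 32 4 (by omega) (by omega) rfl) (by u_omega)
  · v_inv
  · -- get32_packet's precondition
    have hun : ShadowUntouched v.mem s_1140b3.mem := by v_untouched
    refine ⟨⟨?_, hfr.offText⟩, ?_, ?_⟩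
    · refine (hfr.shadow.untouched hun).lower ?_ ?_ ?_
      · rw [w_rsp]
        u_omega
      · rw [w_rsp]
        u_omega
      · rw [w_rsp]
        u_omega
    · rw [w_rdi]
      exact readerEnv hhand hsd.env.live
    · rw [w_rdi, w_mem]
      exact (Reader.store_off_obj hsd.bits _ 8 _ (by u_omega) (by u_omega)).1.bits
  · -- the exit `n ≤ i` (0x114127): `At8`
    have hbel : Below g v.mem s_1140ae.mem := by
      unfold Below
      rw [w_mem]
      u_same
    have hrsp' : s_1140ae.reg .rsp = addr g.R := by
      rw [w_rsp, hfr.rsp.symm, c_rsp]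
    have hfr' : Frame u₀ g pc_8 A s_1140ae := hbel.frame hfr w_rip hrsp' w_eq (by v_inv)
    have hsd' := hbel.sdw hfr hhand hsd
    have hcom' := hbel.comment hfr hhand hsd hcom
    refine ReachVia.done (Or.inl ⟨A, hfr', hhand, ?_, hsd', hnoT, ?_⟩)
    · rw [w_kept.get .rbp rfl, c_rbp]
      exact (addr_toNat _).symm
    · -- CM1 – CM3 complete: the counter has reached the count (or the count is not positive)
      rw [CommentsOK_def]
      have hcnt' : stb_vorbis.comment_list_length s_1140ae.mem g.f = stb_vorbis.comment_list_length v.mem g.f := by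
        have hobr' := hobr
        have hab' := hab
        have h3 := hfr.ra.2.1
        simp only [depth] at h3
        simp only [vacc, voff]
        exact (hbel.eqOn g.f (g.f + 1808) (by omega)).i32 _ (by omega) (by omega) (by omega)
      rw [toInt_ofNat32 n32 hlt32, toInt_ofNat32 i (by omega)] at hbr_1140ae
      have hsi : sint32 i = (i : Int) := by
        have := sint32_cases i
        omega
      have hexit : stb_vorbis.comment_list_length s_1140ae.mem g.f ≤ (i : Int) := by
        rw [hcnt', hcnt]
        omega
      have e : (stb_vorbis.comment_list_length s_1140ae.mem g.f).toNat = i := by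
        rcases hcom'.le with hle | h0
        · omega
        · omega
      rw [e]
      exact hcom'
  · -- after `get32_packet` (0x1140b8): the open part
    have hlt : (i : Int) < stb_vorbis.comment_list_length v.mem g.f := by
      rw [toInt_ofNat32 n32 hlt32, toInt_ofNat32 i (by omega)] at hbr_1140ae
      have hsi := sint32_cases i
      rw [hcnt]
      omega
    have hrbp' : s_1140b3r.reg .rbp = g.e.reg .rdi := by
      rw [w_kept.get .rbp rfl, c_rbp]
    v_after_call w_rsp_1140b3 w_mem_1140b3
    simp only [w_rdi_1140b3] at w_same
    have hrd : Rd g v.mem s_1140b3r.mem := by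
      show Mem.SameExcept [⟨(g.e.reg .rsp).toNat - 1888, (g.e.reg .rsp).toNat - 1480⟩,
        ⟨(g.e.reg .rdi).toNat + 48, (g.e.reg .rdi).toNat + 56⟩, ⟨(g.e.reg .rdi).toNat + 84, (g.e.reg .rdi).toNat + 96⟩,
        ⟨(g.e.reg .rdi).toNat + 136, (g.e.reg .rdi).toNat + 144⟩, ⟨(g.e.reg .rdi).toNat + 1484, (g.e.reg .rdi).toNat + 1749⟩,
        ⟨(g.e.reg .rdi).toNat + 1752, (g.e.reg .rdi).toNat + 1764⟩,
        ⟨(g.e.reg .rdi).toNat + 1768, (g.e.reg .rdi).toNat + 1784⟩] v.mem s_1140b3r.mem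
      u_same
    have hp : Get32PacketPost (g.Blk A) g.len (s_1140b3.reg .rdi).toNat s_1140b3 s_1140b3r := w_post
    rw [w_rdi_1140b3] at hp
    have hun : ShadowUntouched v.mem s_1140b3r.mem := by v_untouched
    have hrsp' : s_1140b3r.reg .rsp = addr g.R := by
      rw [w_rsp, hfr.rsp.symm, c_rsp]
    have hrbp'' : s_1140b3r.reg .rbp = addr g.f := by
      rw [hrbp']
      exact (addr_toNat _).symm
    exact ReachVia.done (Or.inr ⟨A, In7a.of_reader hb0 hrd hun w_rip hrsp' hrbp'' w_eq (show abiInv _ from w_inv)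
      hp.reader.bits hp.result hlt⟩)

/-! ### Sub-segments 7.b – 7.e, walked; the unit's statement from the contract fix -/

/-- **7.e** (0x11403a … 0x11406d): the three checks and the byte store `comment_list[i][j] = al`, `++j`. -/
theorem segE {Lay : Layout} (hLay : Lay.hi = 0x1000000) {μ : Microarch} (hμ : UserX.MicroOK μ) {u₀ : State}
    (hcode : HasCodeNat Lay u₀ Vorbis.L.start_decoder.entry Vorbis.Code.code_start_decoder.nat Vorbis.L.start_decoder.size)
    (h_load8 : Asan.SmallCheck Lay μ Vorbis.WayInv (Vorbis.CodeOK u₀) [.rax, .rcx, .rdx] 8 Vorbis.L.__asan_load8_noabort.entry)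
    (h_store1 : Asan.SmallCheck Lay μ Vorbis.WayInv (Vorbis.CodeOK u₀) [.rax, .rdx] 1 Vorbis.L.__asan_store1_noabort.entry) :
    SegE Lay μ u₀ := by
  intro g A i n len j v h7d
  have h7d0 := h7d
  obtain ⟨⟨hfr, hhand, hrbp, hsd, hnoT, hslot, hcount, hlt⟩, hcom, hrbx, hlenle, hr12, hr13, hjlt, hstr, hne⟩ := h7d
  have he := hfr.entry
  v_entry he
  simp only [depth] at he_room he_stack
  obtain ⟨k1, k2, k3, k4, k5, k6⟩ := where_all hfr hhand hsd
  have hgf : g.f = (g.e.reg .rdi).toNat := rfl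
  have hgRA : g.RA = (g.e.reg .rsp).toNat := rfl
  -- the table block and the string block
  have hn0 : (i : Int) < stb_vorbis.comment_list_length v.mem g.f := by
    rw [hcount]
    exact hlt
  have htab : A.1.Blk ⟨stb_vorbis.comment_list v.mem g.f, 8 * (stb_vorbis.comment_list_length v.mem g.f).toNat⟩ := by
    rcases hcom.CM2 with h0 | h1
    · omega
    · exact h1.2
  obtain ⟨t1, t2, t3, t4, t5, t6⟩ := blk_where7 hfr hhand hsd htab
  obtain ⟨s1, s2, s3, s4, s5, s6⟩ := blk_where7 hfr hhand hsd hstr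
  simp only [] at t1 t2 t3 s1 s2 s3
  obtain ⟨cl, hcl⟩ : ∃ cl : Nat, stb_vorbis.comment_list v.mem g.f = cl := ⟨_, rfl⟩
  obtain ⟨sp, hsp⟩ : ∃ sp : Nat, v.mem.ptr (stb_vorbis.comment_list_at v.mem g.f i) = sp := ⟨_, rfl⟩
  have hat : stb_vorbis.comment_list_at v.mem g.f i = cl + 8 * i := by
    show stb_vorbis.comment_list v.mem g.f + 8 * i = _
    rw [hcl]
  have hin_str := arena_inside hsd.arena hstr
  simp only [] at hin_str
  have hstr' := hstr
  have hne' := hne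
  rw [hsp] at s1 s2 s3 hin_str hstr' hne'
  rw [hcl] at hne'
  rw [hat] at hsp
  rw [hcl] at t1 t2 t3
  have w_rip := hfr.rip
  have c_rsp : v.reg .rsp = g.e.reg .rsp - 1480 := by
    rw [hfr.rsp]
    have e0 := slot_addr hfr 0 1480 rfl
    rw [Nat.add_zero] at e0
    exact e0
  have c_rbp : v.reg .rbp = g.e.reg .rdi := by
    rw [hrbp]
    exact addr_toNat _
  clear hrbp
  have c_r12 : v.reg .r12 = UInt64.ofNat (8 * i) := hr12
  have c_r13 : v.reg .r13 = UInt64.ofNat j := hr13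
  have c_rbx : v.reg .rbx = UInt64.ofNat len := hrbx
  clear hr12 hr13 hrbx
  have w_eq : Mem.EqOn Vorbis.L.textLo Vorbis.L.textHi u₀.mem v.mem := hfr.code
  have hdf : v.flags .df = false := (show abiInv _ from hfr.inv).1
  have hmx : v.mxcsr &&& 0x1F80 = 0x1F80 := (show abiInv _ from hfr.inv).2
  have hsse := Vorbis.sseOK_of_abiInv hfr.inv
  have l_cl : v.mem.readLE (g.e.reg .rdi + 40) 8 = cl := by
    rw [← hcl]
    have ea : addr g.f = g.e.reg .rdi := addr_toNat _
    show v.mem.readLE (g.e.reg .rdi + 40) 8 = v.mem.readLE (addr (g.f + 40)) 8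
    rw [← addr_add_lit, ea]
  have l_sp : v.mem.readLE (UInt64.ofNat (8 * i) + UInt64.ofNat cl) 8 = sp := by
    rw [← hsp]
    show _ = v.mem.readLE (UInt64.ofNat (cl + 8 * i)) 8
    rw [UInt64.ofNat_add, UInt64.add_comm]
  have hjp : (Word.part .w32 (UInt64.ofNat j)).toNat = j := by
    rw [toNat_part32, UInt64.toNat_ofNat']
    omega
  have hsx : Word.ofBV (BitVec.signExtend 64 (Word.part .w32 (UInt64.ofNat j))) = UInt64.ofNat j := by
    have h1 := toNat_sext32 (Word.part .w32 (UInt64.ofNat j)) (by rw [hjp]; omega)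
    rw [hjp] at h1
    exact eq_addr _ _ h1
  have hj1 : Word.ofBV (Word.part .w32 (UInt64.ofNat j) + 1#32) = UInt64.ofNat (j + 1) := by
    apply eq_addr
    rw [toNat_ofBV32, BitVec.toNat_add, hjp]
    show (j + 1) % 2 ^ 32 = j + 1
    omega
  have hsp_lo : 0x119d40 ≤ sp := by
    have h1 := hhand.arenaText
    have e : L.textHi = 0x119d40 := rfl
    omega
  obtain ⟨x, c_rax⟩ : ∃ x : Word, v.reg .rax = x := ⟨_, rfl⟩
  u_walk hcode [hμ.vendor, hsx, hj1] until [Vorbis.L.start_decoder.cut59] span [Vorbis.L.textLo, Vorbis.L.textHi] side (v_side)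
  · -- check: `f->comment_list` (f + 40)
    have hun : ShadowUntouched v.mem s_114041.mem := by v_untouched
    exact check_site hfr.shadow hun (hsd.bits.site_field hsd.env.live 40 8 (by omega) (by omega) rfl) (by u_omega)
  · -- check: the slot `comment_list[i]`
    have hun : ShadowUntouched v.mem s_114050.mem := by v_untouched
    have hL : BlkLive A.1.Blk (g.Live A) := fun B hB => hsd.env.live B (up g A B hB)
    refine check_site hfr.shadow hun (hcom.CM2.site_slot hL i hn0 (a := cl + 8 * i) hat.symm) ?_
    have hnn : 0 ≤ stb_vorbis.comment_list_length v.mem g.f := by omega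
    u_omega
  · -- check: the byte `comment_list[i][j]`
    have hun : ShadowUntouched v.mem s_114061.mem := by v_untouched
    have hL : BlkLive A.1.Blk (g.Live A) := fun B hB => hsd.env.live B (up g A B hB)
    refine check_site hfr.shadow hun (site_string hL hstr' j (by omega) (a := sp + j) rfl) ?_
    u_omega
  · -- the head of the byte loop again, `j + 1`
    have hb : InBlk g ⟨sp, len + 1⟩ v.mem s_114069.mem := by
      show Mem.SameExcept [⟨(g.e.reg .rsp).toNat - 1888, (g.e.reg .rsp).toNat - 1480⟩, ⟨sp, sp + (len + 1)⟩] v.mem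
        s_114069.mem
      rw [w_mem]
      u_same
    have hrsp' : s_114069.reg .rsp = addr g.R := by
      rw [w_rsp, hfr.rsp.symm, c_rsp]
    have hfr' : Frame u₀ g L.start_decoder.cut59 A s_114069 := hb.frame hfr hhand hsd hstr' w_rip hrsp' w_eq (by v_inv)
    have hsd' := hb.sdw hfr hhand hsd hstr'
    have hcom' := hb.comment hfr hhand hsd hstr' hcom (by
      show sp ≠ stb_vorbis.comment_list v.mem g.f
      rw [hcl]
      exact hne')
    -- `*f` and the table read the same
    have hef : Mem.EqOn g.f (g.f + 1808) v.mem s_114069.mem := hb.eqOn _ _ (by omega) (by simp only []; omega)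
    have e_n : stb_vorbis.comment_list_length s_114069.mem g.f = stb_vorbis.comment_list_length v.mem g.f := by
      simp only [vacc, voff]
      exact hef.i32 _ (by omega) (by omega) (by omega)
    have e_c : stb_vorbis.comment_list s_114069.mem g.f = cl := by
      rw [← hcl]
      simp only [vacc, voff]
      exact hef.ptr _ (by omega) (by omega) (by omega)
    have hdis : (Block.mk cl (8 * (stb_vorbis.comment_list_length v.mem g.f).toNat)).disjoint ⟨sp, len + 1⟩ := by
      rw [← hcl]
      exact hsd.arena.blkOK.disjoint_of_base htab hstr' (by
        show stb_vorbis.comment_list v.mem g.f ≠ sp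
        rw [hcl]
        exact fun e => hne' e.symm)
    simp only [vblock] at hdis
    have hnn : 0 ≤ stb_vorbis.comment_list_length v.mem g.f := by omega
    have e_at : stb_vorbis.comment_list_at s_114069.mem g.f i = cl + 8 * i := by
      show stb_vorbis.comment_list s_114069.mem g.f + 8 * i = _
      rw [e_c]
    have e_p : s_114069.mem.ptr (cl + 8 * i) = sp := by
      rw [← hsp]
      exact (hb.eqOn (cl + 8 * i) (cl + 8 * i + 8) (by omega) (by simp only []; omega)).ptr _ (Nat.le_refl _)
        (Nat.le_refl _) (by omega)
    refine ReachVia.done ⟨A, ⟨hfr', hhand, ?_, hsd', hnoT, ?_, ?_, hlt⟩, hcom', ?_, hlenle, ?_, ?_, ?_, ?_, ?_⟩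
    · rw [w_kept.get .rbp rfl, c_rbp]
      exact (addr_toNat _).symm
    · rw [(hb.eqOn (g.R + 24) (g.R + 28) (by omega) (by simp only []; omega)).u32 _ (by omega) (by omega) (by omega)]
      exact hslot
    · rw [e_n]
      exact hcount
    · rw [w_kept.get .rbx rfl]
      exact c_rbx
    · rw [w_kept.get .r12 rfl]
      exact c_r12
    · exact w_r13
    · omega
    · rw [e_at, e_p]
      exact hstr'
    · rw [e_at, e_p, e_c]
      exact hne'

/-- **7.d** (0x11406d … 0x11403a | 0x11409e): `j < len` → the call of `get8_packet` and `In7d`; else the terminator store,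
`++i`, `At7` with the counter `i + 1`. -/
theorem segD {Lay : Layout} (hLay : Lay.hi = 0x1000000) {μ : Microarch} (hμ : UserX.MicroOK μ) {u₀ : State}
    (hcode : HasCodeNat Lay u₀ Vorbis.L.start_decoder.entry Vorbis.Code.code_start_decoder.nat Vorbis.L.start_decoder.size)
    (h_load8 : Asan.SmallCheck Lay μ Vorbis.WayInv (Vorbis.CodeOK u₀) [.rax, .rcx, .rdx] 8 Vorbis.L.__asan_load8_noabort.entry)
    (h_store1 : Asan.SmallCheck Lay μ Vorbis.WayInv (Vorbis.CodeOK u₀) [.rax, .rdx] 1 Vorbis.L.__asan_store1_noabort.entry)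
    (h_get8 : ∀ (others : List Obj) (frames : List (Nat × FrameLayout)) (Blk : Block → Prop) (len : Nat), Calls Lay μ Vorbis.WayInv (Vorbis.conv u₀) Vorbis.L.get8_packet.entry (Vorbis.Spec.get8_packet.spec others frames Blk len)) :
    SegD Lay μ u₀ := by
  intro g A i n len j v h7c
  have h7c0 := h7c
  obtain ⟨⟨hfr, hhand, hrbp, hsd, hnoT, hslot, hcount, hlt⟩, hcom, hrbx, hlenle, hr12, hr13, hjle, hstr, hne⟩ := h7c
  have hg8 := h_get8 A.2 g.frames' (g.Blk A) g.len
  have he := hfr.entry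
  v_entry he
  simp only [depth] at he_room he_stack
  obtain ⟨k1, k2, k3, k4, k5, k6⟩ := where_all hfr hhand hsd
  have hgf : g.f = (g.e.reg .rdi).toNat := rfl
  have hgRA : g.RA = (g.e.reg .rsp).toNat := rfl
  -- the table block and the string block
  have hn0 : (i : Int) < stb_vorbis.comment_list_length v.mem g.f := by
    rw [hcount]
    exact hlt
  have htab : A.1.Blk ⟨stb_vorbis.comment_list v.mem g.f, 8 * (stb_vorbis.comment_list_length v.mem g.f).toNat⟩ := by
    rcases hcom.CM2 with h0 | h1
    · omega
    · exact h1.2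
  obtain ⟨t1, t2, t3, t4, t5, t6⟩ := blk_where7 hfr hhand hsd htab
  obtain ⟨s1, s2, s3, s4, s5, s6⟩ := blk_where7 hfr hhand hsd hstr
  simp only [] at t1 t2 t3 s1 s2 s3
  obtain ⟨cl, hcl⟩ : ∃ cl : Nat, stb_vorbis.comment_list v.mem g.f = cl := ⟨_, rfl⟩
  obtain ⟨sp, hsp⟩ : ∃ sp : Nat, v.mem.ptr (stb_vorbis.comment_list_at v.mem g.f i) = sp := ⟨_, rfl⟩
  have hat : stb_vorbis.comment_list_at v.mem g.f i = cl + 8 * i := by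
    show stb_vorbis.comment_list v.mem g.f + 8 * i = _
    rw [hcl]
  have hin_str := arena_inside hsd.arena hstr
  simp only [] at hin_str
  have hstr' := hstr
  have hne' := hne
  rw [hsp] at s1 s2 s3 hin_str hstr' hne'
  rw [hcl] at hne'
  rw [hat] at hsp
  rw [hcl] at t1 t2 t3
  have w_rip := hfr.rip
  have c_rsp : v.reg .rsp = g.e.reg .rsp - 1480 := by
    rw [hfr.rsp]
    have e0 := slot_addr hfr 0 1480 rfl
    rw [Nat.add_zero] at e0
    exact e0
  have c_rbp : v.reg .rbp = g.e.reg .rdi := by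
    rw [hrbp]
    exact addr_toNat _
  clear hrbp
  have c_r12 : v.reg .r12 = UInt64.ofNat (8 * i) := hr12
  have c_r13 : v.reg .r13 = UInt64.ofNat j := hr13
  have c_rbx : v.reg .rbx = UInt64.ofNat len := hrbx
  clear hr12 hr13 hrbx
  have w_eq : Mem.EqOn Vorbis.L.textLo Vorbis.L.textHi u₀.mem v.mem := hfr.code
  have hdf : v.flags .df = false := (show abiInv _ from hfr.inv).1
  have hmx : v.mxcsr &&& 0x1F80 = 0x1F80 := (show abiInv _ from hfr.inv).2
  have hsse := Vorbis.sseOK_of_abiInv hfr.inv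
  have l_cl : v.mem.readLE (g.e.reg .rdi + 40) 8 = cl := by
    rw [← hcl]
    have ea : addr g.f = g.e.reg .rdi := addr_toNat _
    show v.mem.readLE (g.e.reg .rdi + 40) 8 = v.mem.readLE (addr (g.f + 40)) 8
    rw [← addr_add_lit, ea]
  have l_sp : v.mem.readLE (UInt64.ofNat (8 * i) + UInt64.ofNat cl) 8 = sp := by
    rw [← hsp]
    show _ = v.mem.readLE (UInt64.ofNat (cl + 8 * i)) 8
    rw [UInt64.ofNat_add, UInt64.add_comm]
  have hjp : (Word.part .w32 (UInt64.ofNat j)).toNat = j := by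
    rw [toNat_part32, UInt64.toNat_ofNat']
    omega
  have hsx : Word.ofBV (BitVec.signExtend 64 (Word.part .w32 (UInt64.ofNat j))) = UInt64.ofNat j := by
    have h1 := toNat_sext32 (Word.part .w32 (UInt64.ofNat j)) (by rw [hjp]; omega)
    rw [hjp] at h1
    exact eq_addr _ _ h1
  have hj1 : Word.ofBV (Word.part .w32 (UInt64.ofNat j) + 1#32) = UInt64.ofNat (j + 1) := by
    apply eq_addr
    rw [toNat_ofBV32, BitVec.toNat_add, hjp]
    show (j + 1) % 2 ^ 32 = j + 1
    omega
  have hsp_lo : 0x119d40 ≤ sp := by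
    have h1 := hhand.arenaText
    have e : L.textHi = 0x119d40 := rfl
    omega
  have l_i : v.mem.readLE (g.e.reg .rsp - 1456) 4 = i := by
    have ea : addr (g.R + 24) = g.e.reg .rsp - 1456 := slot_addr hfr 24 1456 rfl
    rw [← ea]
    exact hslot
  have hlp : (Word.part .w32 (UInt64.ofNat len)).toNat = len := by
    rw [toNat_part32, UInt64.toNat_ofNat']
    omega
  have hlx : Word.ofBV (BitVec.signExtend 64 (Word.part .w32 (UInt64.ofNat len))) = UInt64.ofNat len := by
    have h1 := toNat_sext32 (Word.part .w32 (UInt64.ofNat len)) (by rw [hlp]; omega)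
    rw [hlp] at h1
    exact eq_addr _ _ h1
  u_walk hcode [hμ.vendor, hlx] until [Vorbis.L.start_decoder.cut58, Vorbis.L.start_decoder.cut60] span [Vorbis.L.textLo, Vorbis.L.textHi] side (v_side)
  · v_inv
  · -- get8_packet's precondition
    have hun : ShadowUntouched v.mem s_114035.mem := by v_untouched
    refine ⟨⟨?_, hfr.offText⟩, ?_, ?_⟩
    · refine (hfr.shadow.untouched hun).lower ?_ ?_ ?_
      · rw [w_rsp]
        u_omega
      · rw [w_rsp]
        u_omega
      · rw [w_rsp]
        u_omega
    · rw [w_rdi]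
      exact readerEnv hhand hsd.env.live
    · rw [w_rdi, w_mem]
      exact (Reader.store_off_obj hsd.bits _ 8 _ (by u_omega) (by u_omega)).1.bits
  · -- check: `f->comment_list` (f + 40)
    have hun : ShadowUntouched v.mem s_114076.mem := by v_untouched
    exact check_site hfr.shadow hun (hsd.bits.site_field hsd.env.live 40 8 (by omega) (by omega) rfl) (by u_omega)
  · -- check: the slot `comment_list[i]`
    have hun : ShadowUntouched v.mem s_114082.mem := by v_untouched
    have hL : BlkLive A.1.Blk (g.Live A) := fun B hB => hsd.env.live B (up g A B hB)
    refine check_site hfr.shadow hun (hcom.CM2.site_slot hL i hn0 (a := cl + 8 * i) hat.symm) ?_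
    have hnn : 0 ≤ stb_vorbis.comment_list_length v.mem g.f := by omega
    u_omega
  · -- check: the terminator `comment_list[i][len]`
    have hun : ShadowUntouched v.mem s_114091.mem := by v_untouched
    have hL : BlkLive A.1.Blk (g.Live A) := fun B hB => hsd.env.live B (up g A B hB)
    refine check_site hfr.shadow hun (site_string hL hstr' len (Nat.le_refl _) (a := sp + len) rfl) ?_
    u_omega
  · -- after `get8_packet` (0x11403a): `In7d`
    have hjlt : j < len := by
      rw [toInt_of_lt _ (by rw [hjp]; omega), toInt_of_lt _ (by rw [hlp]; omega), hjp, hlp] at hbr_114070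
      omega
    v_after_call w_rsp_114035 w_mem_114035
    simp only [w_rdi_114035] at w_same
    have hrd : Rd g v.mem s_114035r.mem := by
      show Mem.SameExcept [⟨(g.e.reg .rsp).toNat - 1888, (g.e.reg .rsp).toNat - 1480⟩,
        ⟨(g.e.reg .rdi).toNat + 48, (g.e.reg .rdi).toNat + 56⟩, ⟨(g.e.reg .rdi).toNat + 84, (g.e.reg .rdi).toNat + 96⟩,
        ⟨(g.e.reg .rdi).toNat + 136, (g.e.reg .rdi).toNat + 144⟩, ⟨(g.e.reg .rdi).toNat + 1484, (g.e.reg .rdi).toNat + 1749⟩,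
        ⟨(g.e.reg .rdi).toNat + 1752, (g.e.reg .rdi).toNat + 1764⟩,
        ⟨(g.e.reg .rdi).toNat + 1768, (g.e.reg .rdi).toNat + 1784⟩] v.mem s_114035r.mem
      u_same
    have hp : Get8PacketPost (g.Blk A) g.len (s_114035.reg .rdi).toNat s_114035 s_114035r := w_post
    rw [w_rdi_114035] at hp
    have hun : ShadowUntouched v.mem s_114035r.mem := by v_untouched
    have hrsp' : s_114035r.reg .rsp = addr g.R := by
      rw [w_rsp, hfr.rsp.symm, c_rsp]
    have hrbp'' : s_114035r.reg .rbp = addr g.f := by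
      rw [w_kept.get .rbp rfl, c_rbp]
      exact (addr_toNat _).symm
    exact ReachVia.done (Or.inr ⟨A, In7d.of_reader h7c0 hjlt hrd hun w_rip hrsp' hrbp'' w_eq (show abiInv _ from w_inv)
      hp.reader.bits (w_kept.get .rbx rfl) (w_kept.get .r12 rfl) (w_kept.get .r13 rfl)⟩)
  · -- the end of the iteration (0x11409e): `At7` with the counter `i + 1`
    have hb : Ex g ⟨sp, len + 1⟩ v.mem s_114099.mem := by
      show Mem.SameExcept [⟨(g.e.reg .rsp).toNat - 1888, (g.e.reg .rsp).toNat - 1480⟩, ⟨sp, sp + (len + 1)⟩,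
        ⟨(g.e.reg .rsp).toNat - 1480 + 24, (g.e.reg .rsp).toNat - 1480 + 28⟩] v.mem s_114099.mem
      rw [w_mem]
      u_same
    have hrsp' : s_114099.reg .rsp = addr g.R := by
      rw [w_rsp, hfr.rsp.symm, c_rsp]
    have hnesp : sp ≠ stb_vorbis.comment_list v.mem g.f := by
      rw [hcl]
      exact hne'
    have hfr' : Frame u₀ g pc_7 A s_114099 := hb.frame hfr hhand hsd hstr' w_rip hrsp' w_eq (by v_inv)
    have hsd' := hb.sdw hfr hhand hsd hstr'
    have hcom' := hb.comment hfr hhand hsd hstr' hcom hnesp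
    have hef : Mem.EqOn g.f (g.f + 1808) v.mem s_114099.mem :=
      hb.eqOn _ _ (by omega) (by simp only []; omega) (by omega)
    have e_n : stb_vorbis.comment_list_length s_114099.mem g.f = stb_vorbis.comment_list_length v.mem g.f := by
      simp only [vacc, voff]
      exact hef.i32 _ (by omega) (by omega) (by omega)
    have hn : stb_vorbis.comment_list_length v.mem g.f ≤ 0x0FFFFFFF := by
      rcases hcom.CM2 with h0 | h1
      · omega
      · exact h1.1
    have hslot' : s_114099.mem.u32 (g.R + 24) = i + 1 := by
      have ea : addr (g.R + 24) = g.e.reg .rsp - 1456 := slot_addr hfr 24 1456 rfl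
      show s_114099.mem.readLE (addr (g.R + 24)) 4 = i + 1
      rw [ea, w_mem, Mem.readLE_writeLE_same _ _ _ _ (by decide), BitVec.toNat_add, BitVec.toNat_ofNat]
      show (i % 2 ^ 32 + 1) % 2 ^ 32 % 256 ^ 4 = i + 1
      omega
    refine ReachVia.done (Or.inl ⟨A, ⟨hfr', hhand, ?_, hsd', hnoT, hslot', by omega, hcom'⟩, ?_⟩)
    · rw [w_kept.get .rbp rfl, c_rbp]
      exact (addr_toNat _).symm
    · rw [e_n]
      exact hcount

/-- **7.c** (0x1140ec … 0x11406d | stub 0x114020): the checked store of the pointer, the re-load and the NULL test (`error` →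
`AtERR`), `j = 0`, `In7c`. -/
theorem segC {Lay : Layout} (hLay : Lay.hi = 0x1000000) {μ : Microarch} (hμ : UserX.MicroOK μ) {u₀ : State}
    (hcode : HasCodeNat Lay u₀ Vorbis.L.start_decoder.entry Vorbis.Code.code_start_decoder.nat Vorbis.L.start_decoder.size)
    (h_error : ∀ (others : List Obj) (frames : List (Nat × FrameLayout)), Calls Lay μ Vorbis.WayInv (Vorbis.conv u₀) Vorbis.L.error.entry (Vorbis.Spec.error.spec others frames))
    (h_load8 : Asan.SmallCheck Lay μ Vorbis.WayInv (Vorbis.CodeOK u₀) [.rax, .rcx, .rdx] 8 Vorbis.L.__asan_load8_noabort.entry)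
    (h_store8 : Asan.SmallCheck Lay μ Vorbis.WayInv (Vorbis.CodeOK u₀) [.rax, .rcx, .rdx] 8 Vorbis.L.__asan_store8_noabort.entry) :
    SegC Lay μ u₀ := by
  intro g A i n len p v h7b
  obtain ⟨⟨hfr, hhand, hrbp, hsd, hnoT, hslot, hcount, hlt⟩, hcom, hrbx, hlenle, hr12, hr14, hr15, hrax, hres⟩ := h7b
  have he := hfr.entry
  v_entry he
  simp only [depth] at he_room he_stack
  have herr := h_error A.2 g.frames'
  obtain ⟨k1, k2, k3, k4, k5, k6⟩ := where_all hfr hhand hsd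
  have hgf : g.f = (g.e.reg .rdi).toNat := rfl
  have hgRA : g.RA = (g.e.reg .rsp).toNat := rfl
  have hn0 : (i : Int) < stb_vorbis.comment_list_length v.mem g.f := by
    rw [hcount]
    exact hlt
  have htab : A.1.Blk ⟨stb_vorbis.comment_list v.mem g.f, 8 * (stb_vorbis.comment_list_length v.mem g.f).toNat⟩ := by
    rcases hcom.CM2 with h0 | h1
    · omega
    · exact h1.2
  obtain ⟨t1, t2, t3, t4, t5, t6⟩ := blk_where7 hfr hhand hsd htab
  simp only [] at t1 t2 t3
  have htab_lo : L.textHi ≤ stb_vorbis.comment_list v.mem g.f := by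
    have h1 := hhand.arenaText
    have h2 := arena_inside hsd.arena htab
    simp only [] at h2
    omega
  have hnn : 0 ≤ stb_vorbis.comment_list_length v.mem g.f := by omega
  obtain ⟨cl, hcl⟩ : ∃ cl : Nat, stb_vorbis.comment_list v.mem g.f = cl := ⟨_, rfl⟩
  have hat : stb_vorbis.comment_list_at v.mem g.f i = cl + 8 * i := by
    show stb_vorbis.comment_list v.mem g.f + 8 * i = _
    rw [hcl]
  rw [hcl] at t1 t2 t3 htab_lo
  have e119 : L.textHi = 0x119d40 := rfl
  rw [e119] at htab_lo
  have w_rip := hfr.rip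
  have c_rsp : v.reg .rsp = g.e.reg .rsp - 1480 := by
    rw [hfr.rsp]
    have e0 := slot_addr hfr 0 1480 rfl
    rw [Nat.add_zero] at e0
    exact e0
  have c_rbp : v.reg .rbp = g.e.reg .rdi := by
    rw [hrbp]
    exact addr_toNat _
  clear hrbp
  have c_r12 : v.reg .r12 = UInt64.ofNat (8 * i) := hr12
  have c_rbx : v.reg .rbx = UInt64.ofNat len := hrbx
  have c_rax : v.reg .rax = UInt64.ofNat p := hrax
  have c_r14 : v.reg .r14 = g.e.reg .rdi + 40 := by
    rw [hr14, ← addr_add_lit]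
    have ea : addr g.f = g.e.reg .rdi := addr_toNat _
    rw [ea]
  have c_r15 : v.reg .r15 = UInt64.ofNat (8 * i) + UInt64.ofNat cl := by
    rw [hr15, hat]
    show UInt64.ofNat (cl + 8 * i) = _
    rw [UInt64.ofNat_add, UInt64.add_comm]
  clear hr12 hrbx hrax hr14 hr15
  have w_eq : Mem.EqOn Vorbis.L.textLo Vorbis.L.textHi u₀.mem v.mem := hfr.code
  have hdf : v.flags .df = false := (show abiInv _ from hfr.inv).1
  have hmx : v.mxcsr &&& 0x1F80 = 0x1F80 := (show abiInv _ from hfr.inv).2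
  have hsse := Vorbis.sseOK_of_abiInv hfr.inv
  have l_cl : v.mem.readLE (g.e.reg .rdi + 40) 8 = cl := by
    rw [← hcl]
    have ea : addr g.f = g.e.reg .rdi := addr_toNat _
    show v.mem.readLE (g.e.reg .rdi + 40) 8 = v.mem.readLE (addr (g.f + 40)) 8
    rw [← addr_add_lit, ea]
  u_walk hcode [hμ.vendor] until [Vorbis.L.start_decoder.cut4, Vorbis.L.start_decoder.cut59] span [Vorbis.L.textLo, Vorbis.L.textHi] side (v_side)
  · -- check: the slot `comment_list[i]` (store8)
    have hun : ShadowUntouched v.mem s_1140f2.mem := by v_untouched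
    have hL : BlkLive A.1.Blk (g.Live A) := fun B hB => hsd.env.live B (up g A B hB)
    refine check_site hfr.shadow hun (hcom.CM2.site_slot hL i hn0 (a := cl + 8 * i) hat.symm) ?_
    u_omega
  · -- check: `f->comment_list` (f + 40)
    have hun : ShadowUntouched v.mem s_1140fd.mem := by v_untouched
    exact check_site hfr.shadow hun (hsd.bits.site_field hsd.env.live 40 8 (by omega) (by omega) rfl) (by u_omega)
  · -- check: the slot again (load8)
    have hun : ShadowUntouched v.mem s_11410c.mem := by v_untouched
    have hL : BlkLive A.1.Blk (g.Live A) := fun B hB => hsd.env.live B (up g A B hB)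
    refine check_site hfr.shadow hun (hcom.CM2.site_slot hL i hn0 (a := cl + 8 * i) hat.symm) ?_
    u_omega
  · v_inv
  · -- error's precondition
    have hun : ShadowUntouched v.mem s_114028.mem := by v_untouched
    refine ⟨⟨?_, hfr.offText⟩, ?_⟩
    · refine (hfr.shadow.untouched hun).lower ?_ ?_ ?_
      · rw [w_rsp]
        u_omega
      · rw [w_rsp]
        u_omega
      · rw [w_rsp]
        u_omega
    · rw [w_rdi]
      exact hhand.obj.mono (sub_frames' g A)
  · -- after `error` (0x11402d): `jmp 113b22`, then `AtERR`
    v_after_call w_rsp_114028 w_mem_114028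
    simp only [w_rdi_114028] at w_same
    obtain ⟨w_rax, _, _⟩ := w_post
    have hs0 : Mem.SameExcept [⟨(g.e.reg .rsp).toNat - 1888, (g.e.reg .rsp).toNat - 1480⟩, ⟨cl + 8 * i, cl + 8 * i + 8⟩,
        ⟨(g.e.reg .rdi).toNat + 140, (g.e.reg .rdi).toNat + 144⟩] v.mem s_114028r.mem := by
      u_same
    u_walk hcode [hμ.vendor] until [Vorbis.L.start_decoder.cut4] span [Vorbis.L.textLo, Vorbis.L.textHi] side (v_side)
    refine ReachVia.done (Or.inl ?_)
    rw [← w_mem] at hs0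
    refine atERR_of_harmless hfr hhand hsd hcom hs0 ?_ w_rip ?_ w_eq (by v_inv) ?_
    · intro s hs
      simp only [List.mem_cons, List.mem_nil_iff, or_false] at hs
      rcases hs with rfl | rfl | rfl
      · left
        simp only []
        omega
      · right
        left
        refine ⟨_, htab, ?_, ?_⟩
        · simp only [hcl]
          omega
        · simp only [hcl]
          omega
      · right
        right
        simp only []
        omega
    · rw [w_rsp, hfr.rsp.symm, c_rsp]
    · rw [w_rax]
      rfl
  · -- the head of the byte loop (0x11406d), `j = 0`: `comment_list[i]` is the new block
    have hpb : A.1.Blk ⟨p, len + 1⟩ ∧ p ≠ cl := by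
      rcases hres with h0 | h1
      · rw [h0] at hbr_114116
        exact absurd rfl hbr_114116
      · rw [hcl] at h1
        exact h1
    obtain ⟨hp, hpne⟩ := hpb
    have hpin := hsd.arena.blkOK.inside _ hp
    simp only [] at hpin
    have hb8 : InBlk g ⟨cl + 8 * i, 8⟩ v.mem s_114122.mem := by
      show Mem.SameExcept [⟨(g.e.reg .rsp).toNat - 1888, (g.e.reg .rsp).toNat - 1480⟩, ⟨cl + 8 * i, cl + 8 * i + 8⟩] v.mem
        s_114122.mem
      rw [w_mem]
      u_same
    have hbT : InBlk g ⟨cl, 8 * (stb_vorbis.comment_list_length v.mem g.f).toNat⟩ v.mem s_114122.mem := by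
      refine hb8.mono ?_
      intro w hw a ha1 ha2
      simp only [List.mem_cons, List.mem_nil_iff, or_false] at hw
      rcases hw with rfl | rfl
      · exact ⟨_, List.mem_cons_self, ha1, ha2⟩
      · refine ⟨(Block.mk cl (8 * (stb_vorbis.comment_list_length v.mem g.f).toNat)).span, ?_, ?_, ?_⟩
        · simp only [List.mem_cons, true_or, or_true]
        · simp only [vblock] at ha1 ⊢
          omega
        · simp only [vblock] at ha2 ⊢
          omega
    have htab' : A.1.Blk ⟨cl, 8 * (stb_vorbis.comment_list_length v.mem g.f).toNat⟩ := by
      rw [← hcl]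
      exact htab
    have hrsp' : s_114122.reg .rsp = addr g.R := by
      rw [w_rsp, hfr.rsp.symm, c_rsp]
    have hfr' : Frame u₀ g L.start_decoder.cut59 A s_114122 := hbT.frame hfr hhand hsd htab' w_rip hrsp' w_eq (by v_inv)
    have hsd' := hbT.sdw hfr hhand hsd htab'
    have hslotv : s_114122.mem.ptr (cl + 8 * i) = p := by
      show s_114122.mem.readLE (UInt64.ofNat (cl + 8 * i)) 8 = p
      have ea : UInt64.ofNat (cl + 8 * i) = UInt64.ofNat (8 * i) + UInt64.ofNat cl := by
        rw [UInt64.ofNat_add, UInt64.add_comm]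
      rw [ea]
      have hr : s_114122.mem.readLE (UInt64.ofNat (8 * i) + UInt64.ofNat cl) 8 = (UInt64.ofNat p).toNat % 256 ^ 8 := by
        u_resolve
      rw [hr, UInt64.toNat_ofNat']
      omega
    have hcom' : CommentOK A.1.Blk s_114122.mem g.f (i + 1) := by
      refine comment_store_slot hfr hhand hsd hcom hn0 ?_ ?_ hp (by omega)
      · rw [hat]
        exact hb8
      · rw [hat]
        exact hslotv
    have hef : Mem.EqOn g.f (g.f + 1808) v.mem s_114122.mem := hbT.eqOn _ _ (by omega) (by simp only []; omega)
    have e_n : stb_vorbis.comment_list_length s_114122.mem g.f = stb_vorbis.comment_list_length v.mem g.f := by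
      simp only [vacc, voff]
      exact hef.i32 _ (by omega) (by omega) (by omega)
    have e_c : stb_vorbis.comment_list s_114122.mem g.f = cl := by
      rw [← hcl]
      simp only [vacc, voff]
      exact hef.ptr _ (by omega) (by omega) (by omega)
    have e_at : stb_vorbis.comment_list_at s_114122.mem g.f i = cl + 8 * i := by
      show stb_vorbis.comment_list s_114122.mem g.f + 8 * i = _
      rw [e_c]
    refine ReachVia.done (Or.inr ⟨A, ⟨hfr', hhand, ?_, hsd', hnoT, ?_, ?_, hlt⟩, hcom', ?_, hlenle, ?_, ?_, Nat.zero_le _, ?_, ?_⟩)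
    · rw [w_kept.get .rbp rfl, c_rbp]
      exact (addr_toNat _).symm
    · rw [(hbT.eqOn (g.R + 24) (g.R + 28) (by omega) (by simp only []; omega)).u32 _ (by omega) (by omega) (by omega)]
      exact hslot
    · rw [e_n]
      exact hcount
    · rw [w_kept.get .rbx rfl]
      exact c_rbx
    · rw [w_kept.get .r12 rfl]
      exact c_r12
    · rw [w_r13]
      rfl
    · rw [e_at, hslotv]
      exact hp
    · rw [e_at, hslotv, e_c]
      exact hpne

/-- **7.b** (0x1140b8 … 0x1140ec): FIX 1 (`ja` → the stub
0x11400e → `error` → `AtERR`), the check of `f->comment_list`, r12 = 8·i, r15 = &comment_list[i], the call, `In7b`. -/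
theorem segB {Lay : Layout} (hLay : Lay.hi = 0x1000000) {μ : Microarch} (hμ : UserX.MicroOK μ) {u₀ : State}
    (hcode : HasCodeNat Lay u₀ Vorbis.L.start_decoder.entry Vorbis.Code.code_start_decoder.nat Vorbis.L.start_decoder.size)
    (h_error : ∀ (others : List Obj) (frames : List (Nat × FrameLayout)), Calls Lay μ Vorbis.WayInv (Vorbis.conv u₀) Vorbis.L.error.entry (Vorbis.Spec.error.spec others frames))
    (h_load8 : Asan.SmallCheck Lay μ Vorbis.WayInv (Vorbis.CodeOK u₀) [.rax, .rcx, .rdx] 8 Vorbis.L.__asan_load8_noabort.entry)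
    (h_malloc : ∀ (others : List Obj) (frames : List (Nat × FrameLayout)) (A : Arena), Calls Lay μ Vorbis.WayInv (Vorbis.conv u₀) Vorbis.L.setup_malloc.entry (Vorbis.Spec.setup_malloc.spec others frames A)) :
    SegB Lay μ u₀ := by
  intro g A i n v h7a
  have h7a0 := h7a
  obtain ⟨⟨hfr, hhand, hrbp, hsd, hnoT, hslot, hcount, hlt⟩, hcom, hrax⟩ := h7a
  have hile : i ≤ 0x0FFFFFFF := by
    rcases hcom.CM2 with h0 | h1
    · omega
    · have := h1.1
      omega
  have he := hfr.entry
  v_entry he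
  simp only [depth] at he_room he_stack
  have herr := h_error A.2 g.frames'
  have hmal := h_malloc A.2 g.frames' A.1
  have hRA : g.R + 1480 = (g.e.reg .rsp).toNat := hfr.r_eq.1
  have hR8 : g.R % 8 = 0 := hfr.r_eq.2
  have hgf : g.f = (g.e.reg .rdi).toNat := rfl
  have hgRA : g.RA = (g.e.reg .rsp).toNat := rfl
  have hab := obj_above hfr hhand
  have hobr := hsd.bits.OBR
  simp only [voff] at hobr
  have w_rip := hfr.rip
  have c_rsp : v.reg .rsp = g.e.reg .rsp - 1480 := by
    rw [hfr.rsp]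
    have e0 := slot_addr hfr 0 1480 rfl
    rw [Nat.add_zero] at e0
    exact e0
  have c_rbp : v.reg .rbp = g.e.reg .rdi := by
    rw [hrbp]
    exact addr_toNat _
  clear hrbp
  have w_eq : Mem.EqOn Vorbis.L.textLo Vorbis.L.textHi u₀.mem v.mem := hfr.code
  have hdf : v.flags .df = false := (show abiInv _ from hfr.inv).1
  have hmx : v.mxcsr &&& 0x1F80 = 0x1F80 := (show abiInv _ from hfr.inv).2
  have hsse := Vorbis.sseOK_of_abiInv hfr.inv
  have l_i : v.mem.readLE (g.e.reg .rsp - 1456) 4 = i := by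
    have ea : addr (g.R + 24) = g.e.reg .rsp - 1456 := slot_addr hfr 24 1456 rfl
    rw [← ea]
    exact hslot
  obtain ⟨cl, hcl⟩ : ∃ cl : Nat, stb_vorbis.comment_list v.mem g.f = cl := ⟨_, rfl⟩
  have l_cl : v.mem.readLE (g.e.reg .rdi + 40) 8 = cl := by
    rw [← hcl]
    have ea : addr g.f = g.e.reg .rdi := addr_toNat _
    show v.mem.readLE (g.e.reg .rdi + 40) 8 = v.mem.readLE (addr (g.f + 40)) 8
    rw [← addr_add_lit, ea]
  obtain ⟨x, c_rax⟩ : ∃ x : Word, v.reg .rax = x := ⟨_, rfl⟩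
  have hip : (BitVec.ofNat 32 i).toNat = i := toNat_ofNat32 i (by omega)
  have hsxi : Word.ofBV (BitVec.signExtend 64 (BitVec.ofNat 32 i)) = UInt64.ofNat i := by
    have h1 := toNat_sext32 (BitVec.ofNat 32 i) (by rw [hip]; omega)
    rw [hip] at h1
    exact eq_addr _ _ h1
  have hshl : UInt64.ofNat i <<< 3 = UInt64.ofNat (8 * i) := by
    apply eq_addr
    rw [UInt64.toNat_shiftLeft, UInt64.toNat_ofNat']
    have e3 : UInt64.toNat 3 % 64 = 3 := rfl
    rw [e3, Nat.shiftLeft_eq]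
    omega
  u_walk hcode [hμ.vendor, hsxi, hshl] until [Vorbis.L.start_decoder.cut4, Vorbis.L.start_decoder.cut62] span [Vorbis.L.textLo, Vorbis.L.textHi] side (v_side)
  · v_inv
  · -- error's precondition (stub 0x11400e)
    have hun : ShadowUntouched v.mem s_114016.mem := by v_untouched
    refine ⟨⟨?_, hfr.offText⟩, ?_⟩
    · refine (hfr.shadow.untouched hun).lower ?_ ?_ ?_
      · rw [w_rsp]
        u_omega
      · rw [w_rsp]
        u_omega
      · rw [w_rsp]
        u_omega
    · rw [w_rdi]
      exact hhand.obj.mono (sub_frames' g A)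
  · -- check: `f->comment_list` (f + 40)
    have hun : ShadowUntouched v.mem s_1140cc.mem := by v_untouched
    exact check_site hfr.shadow hun (hsd.bits.site_field hsd.env.live 40 8 (by omega) (by omega) rfl) (by u_omega)
  · v_inv
  · -- setup_malloc's precondition
    have hbel : Below g v.mem s_1140e7.mem := by
      show Mem.SameExcept [⟨(g.e.reg .rsp).toNat - 1888, (g.e.reg .rsp).toNat - 1480⟩] v.mem s_1140e7.mem
      rw [w_mem]
      u_same
    have hun : ShadowUntouched v.mem s_1140e7.mem := by v_untouched
    refine ⟨⟨?_, hfr.offText⟩, ?_, ?_, hhand.arenaText⟩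
    · refine (hfr.shadow.untouched hun).lower ?_ ?_ ?_
      · rw [w_rsp]
        u_omega
      · rw [w_rsp]
        u_omega
      · rw [w_rsp]
        u_omega
    · rw [w_rdi]
      exact hsd.env.live _ hsd.bits.OB1
    · rw [w_rdi]
      exact (hbel.sdw hfr hhand hsd).arena
  · -- after `error` (0x11401b): `jmp 113b22`, then `AtERR`
    v_after_call w_rsp_114016 w_mem_114016
    simp only [w_rdi_114016] at w_same
    obtain ⟨w_rax, _, _⟩ := w_post
    have hs0 : Mem.SameExcept [⟨(g.e.reg .rsp).toNat - 1888, (g.e.reg .rsp).toNat - 1480⟩,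
        ⟨(g.e.reg .rdi).toNat + 140, (g.e.reg .rdi).toNat + 144⟩] v.mem s_114016r.mem := by
      u_same
    u_walk hcode [hμ.vendor] until [Vorbis.L.start_decoder.cut4] span [Vorbis.L.textLo, Vorbis.L.textHi] side (v_side)
    refine ReachVia.done (Or.inl ?_)
    rw [← w_mem] at hs0
    refine atERR_of_harmless hfr hhand hsd hcom hs0 ?_ w_rip ?_ w_eq (by v_inv) ?_
    · intro s hs
      simp only [List.mem_cons, List.mem_nil_iff, or_false] at hs
      rcases hs with rfl | rfl
      · left
        simp only []
        omega
      · right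
        right
        simp only []
        omega
    · rw [w_rsp, hfr.rsp.symm, c_rsp]
    · rw [w_rax]
      rfl
  · -- after `setup_malloc` (0x1140ec): `In7b`
    have hlenx : (Word.part .w32 x).toNat ≤ 0x7ffffffe := hbr_1140bf
    have hs_rsi : (s_1140e7.reg .rsi).toNat % 2 ^ 32 = (Word.part .w32 x).toNat + 1 := by
      rw [w_rsi_1140e7, toNat_ofBV32, BitVec.toNat_setWidth, UInt64.toNat_toBitVec, UInt64.toNat_add, toNat_ofBV32]
      show ((Word.part .w32 x).toNat + 1) % 2 ^ 64 % 2 ^ 32 % 2 ^ 32 = _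
      omega
    have hbel : Below g v.mem s_1140e7.mem := by
      show Mem.SameExcept [⟨(g.e.reg .rsp).toNat - 1888, (g.e.reg .rsp).toNat - 1480⟩] v.mem s_1140e7.mem
      rw [w_mem_1140e7]
      u_same
    have hun_vs : ShadowUntouched v.mem s_1140e7.mem := hbel.eqOn _ _ (Or.inr (by omega))
    have hpost := w_post
    have w_eq := Vorbis.conv_code_eqOn w_code
    simp only [X86.User.Spec.footprint, vspec, w_rsp_1140e7, w_rdi_1140e7] at w_same
    rw [hs_rsi] at w_same
    have hm : Mem.SameExcept (MlSpans g A.1 ((Word.part .w32 x).toNat + 1)) v.mem s_1140e7r.mem := by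
      refine (Mem.SameExcept.mono hbel ?_).trans (Mem.SameExcept.mono w_same ?_)
      · intro w hw a ha1 ha2
        have e : w = ⟨g.RA - 1888, g.R⟩ := List.mem_singleton.mp hw
        subst e
        exact ⟨_, List.mem_cons_self, ha1, ha2⟩
      · intro w hw a ha1 ha2
        simp only [List.mem_cons, List.mem_nil_iff, or_false] at hw
        rcases hw with rfl | rfl | rfl | rfl
        · refine ⟨⟨g.RA - 1888, g.R⟩, List.mem_cons_self, ?_, ?_⟩
          · simp only [] at ha1 ⊢
            u_omega
          · simp only [] at ha2 ⊢
            u_omega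
        · exact ⟨⟨g.f + 8, g.f + 12⟩, by simp only [MlSpans, List.mem_cons, true_or, or_true], ha1, ha2⟩
        · exact ⟨⟨g.f + 128, g.f + 132⟩, by simp only [MlSpans, List.mem_cons, true_or, or_true], ha1, ha2⟩
        · exact ⟨_, by simp only [MlSpans, List.mem_cons, List.mem_nil_iff, or_false, or_true], ha1, ha2⟩
    have hfail : ¬ A.1.Fits ((Word.part .w32 x).toNat + 1) → Mem.EqOn 0xE00000 (2 ^ 64) v.mem s_1140e7r.mem := by
      intro hnf
      -- the failure clause's own footprint (80 bytes of stack, `setup_memory_required`) lies below E00000H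
      have hnf' : ¬ A.1.Fits ((s_1140e7.reg .rsi).toNat % 2 ^ 32) := by
        rw [hs_rsi]
        exact hnf
      have hfp := (hpost.2 hnf').2.2.2
      simp only [w_rsp_1140e7, w_rdi_1140e7] at hfp
      refine Mem.EqOn.trans (hbel.eqOn _ _ (Or.inr (by omega))) (hfp.eqOn _ _ ?_)
      intro w hw
      simp only [List.mem_cons, List.mem_nil_iff, or_false] at hw
      rcases hw with rfl | rfl
      · right
        simp only []
        u_omega
      · right
        simp only []
        u_omega
    have hrsp' : s_1140e7r.reg .rsp = addr g.R := by
      rw [w_rsp, hfr.rsp.symm, c_rsp]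
    have hrbp' : s_1140e7r.reg .rbp = addr g.f := by
      rw [w_kept.get .rbp rfl, c_rbp]
      exact (addr_toNat _).symm
    have hat : stb_vorbis.comment_list_at v.mem g.f i = cl + 8 * i := by
      show stb_vorbis.comment_list v.mem g.f + 8 * i = _
      rw [hcl]
    have hs_top : (s_1140e7.reg .rsp).toNat + 8 = g.R := by
      rw [w_rsp_1140e7]
      u_omega
    have hs_rdi : (s_1140e7.reg .rdi).toNat = g.f := by
      rw [w_rdi_1140e7]
      rfl
    have hrbx' : s_1140e7r.reg .rbx = addr (Word.part .w32 x).toNat := by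
      rw [w_rbx]
      exact eq_addr _ _ (toNat_ofBV32 _)
    have hr14' : s_1140e7r.reg .r14 = addr (g.f + 40) := by
      rw [w_r14, ← addr_add_lit]
      have ea : addr g.f = g.e.reg .rdi := addr_toNat _
      rw [ea]
    have hr15' : s_1140e7r.reg .r15 = addr (stb_vorbis.comment_list_at v.mem g.f i) := by
      rw [w_r15, hat]
      show _ = UInt64.ofNat (cl + 8 * i)
      rw [UInt64.ofNat_add, UInt64.add_comm]
    obtain ⟨A', p, h7b⟩ := In7b.of_malloc h7a0 hlenx hs_top hs_rdi hs_rsi hm hpost hun_vs hfail w_rip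
      hrsp' hrbp' w_eq (show abiInv _ from w_inv) hrbx' w_r12 hr14' hr15'
    exact ReachVia.done (Or.inr ⟨A', _, p, h7b⟩)

/-- **THE UNIT'S STATEMENT**: from the hypotheses of `Vorbis.Spec.start_decoder_7.Statement` (the code, the callees' contracts),
`StartDecoder.Seg7` holds: the five sub-segments composed by `compose7`. -/
theorem seg7 {Lay : Layout} (hLay : Lay.hi = 0x1000000) {μ : Microarch} (hμ : UserX.MicroOK μ) {u₀ : State}
    (hcode : HasCodeNat Lay u₀ Vorbis.L.start_decoder.entry Vorbis.Code.code_start_decoder.nat Vorbis.L.start_decoder.size)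
    (h_error : ∀ (others : List Obj) (frames : List (Nat × FrameLayout)), Calls Lay μ Vorbis.WayInv (Vorbis.conv u₀) Vorbis.L.error.entry (Vorbis.Spec.error.spec others frames))
    (h_get8_packet : ∀ (others : List Obj) (frames : List (Nat × FrameLayout)) (Blk : Block → Prop) (len : Nat), Calls Lay μ Vorbis.WayInv (Vorbis.conv u₀) Vorbis.L.get8_packet.entry (Vorbis.Spec.get8_packet.spec others frames Blk len))
    (h_load8 : Asan.SmallCheck Lay μ Vorbis.WayInv (Vorbis.CodeOK u₀) [.rax, .rcx, .rdx] 8 Vorbis.L.__asan_load8_noabort.entry)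
    (h_store1 : Asan.SmallCheck Lay μ Vorbis.WayInv (Vorbis.CodeOK u₀) [.rax, .rdx] 1 Vorbis.L.__asan_store1_noabort.entry)
    (h_load4 : Asan.SmallCheck Lay μ Vorbis.WayInv (Vorbis.CodeOK u₀) [.rax, .rcx, .rdx] 4 Vorbis.L.__asan_load4_noabort.entry)
    (h_get32_packet : ∀ (others : List Obj) (frames : List (Nat × FrameLayout)) (Blk : Block → Prop) (len : Nat), Calls Lay μ Vorbis.WayInv (Vorbis.conv u₀) Vorbis.L.get32_packet.entry (Vorbis.Spec.get32_packet.spec others frames Blk len))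
    (h_setup_malloc : ∀ (others : List Obj) (frames : List (Nat × FrameLayout)) (A : Arena), Calls Lay μ Vorbis.WayInv (Vorbis.conv u₀) Vorbis.L.setup_malloc.entry (Vorbis.Spec.setup_malloc.spec others frames A))
    (h_store8 : Asan.SmallCheck Lay μ Vorbis.WayInv (Vorbis.CodeOK u₀) [.rax, .rcx, .rdx] 8 Vorbis.L.__asan_store8_noabort.entry) :
    Vorbis.Spec.StartDecoder.Seg7 Lay μ u₀ :=
  compose7 (segA hLay hμ hcode h_load4 h_get32_packet) (segB hLay hμ hcode h_error h_load8 h_setup_malloc)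
    (segC hLay hμ hcode h_error h_load8 h_store8) (segD hLay hμ hcode h_load8 h_store1 h_get8_packet)
    (segE hLay hμ hcode h_load8 h_store1)

end Vorbis.Spec.start_decoder_7
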